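/- GENERATED by mk_final_copies.py from the proof of the farm's unit `decode_residue.6b` (farm:decode_residue.6b.1: Lemmas.lean) as the
   re-elaboration sweep compiled it — do not edit. -/
import Asan.CheckWalk
import Vorbis.Spec.Units.decode_residue_6b

/-
  HEAD START for the proof unit `decode_residue.6b` (the body proper of the i-loop 2229, 0x10f579 … with the call at 0x10f538): the
  lemmas of the worker of decode_residue.6 (attempt 1) that the body needs. `deintPre_of` is the WHOLE precondition of the call;
  `Common.same` after the call: the tree's `Entered.same_through_deint` (Vorbis/Spec/DecodeResidueCarry.lean).
-/
namespace Vorbis.Spec.decode_residue_6b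
open X86 X86.User Asan Vorbis Vorbis.Spec Vorbis.Spec.DecodeResidue

/-- The windows of the own stack frame that path A stores to between two cut points: `[RA−848, RA−248)` (below the steady
stack pointer), `class_set = [rbp−0xd8, +4)`, `[rbp−0xb8, +4)`, `[rbp−0x98, +4)`, `c_inter = [rbp−0x60, +4)`, `p_inter = [rbp−0x50, +4)`. -/
def ownWins (g : G) : List Span :=
  [⟨g.RA - 848, g.RA - 248⟩, ⟨g.RA - 224, g.RA - 220⟩, ⟨g.RA - 192, g.RA - 188⟩, ⟨g.RA - 160, g.RA - 156⟩,
   ⟨g.RA - 104, g.RA - 100⟩, ⟨g.RA - 88, g.RA - 84⟩]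

/-- Every window of `ownWins` lies inside the stack window `[RA − 848, RA)` of the contract's footprint. -/
theorem ownWins_stack (g : G) (hroom : 0x700000 + 848 ≤ g.RA) :
    ∀ w, w ∈ ownWins g → g.RA - 848 ≤ w.lo ∧ w.hi ≤ g.RA ∧ w.lo ≤ w.hi := by
  intro w hw
  simp only [ownWins, List.mem_cons, List.mem_nil_iff, or_false] at hw
  rcases hw with rfl | rfl | rfl | rfl | rfl | rfl <;> simp only [] <;> omega

/-- The value of a stack address `RA − k` as a number. -/
theorem toNat_slot6 (g : G) (hroom : 0x700000 + 848 ≤ g.RA) (k : Nat) (hk : k ≤ 848) :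
    (g.e.reg .rsp - UInt64.ofNat k).toNat = g.RA - k := by
  have e : (g.e.reg .rsp).toNat = g.RA := rfl
  have hlt := (g.e.reg .rsp).toNat_lt
  have hk' : (UInt64.ofNat k).toNat = k := by
    rw [UInt64.toNat_ofNat']
    exact Nat.mod_eq_of_lt (by omega)
  have hle : UInt64.ofNat k ≤ g.e.reg .rsp := by
    rw [UInt64.le_iff_toNat_le, hk', e]
    omega
  rw [UInt64.toNat_sub_of_le _ _ hle, hk', e]

/-- **A slot of the frame outside `ownWins` reads the same**: `[RA − k, RA − k + n)` with `n ≤ k ≤ 848`, disjoint from the six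
windows (for a literal `k`, `n` the last hypothesis is `by omega`). -/
theorem stack_read {g : G} {m m' : Mem} (hroom : 0x700000 + 848 ≤ g.RA ∧ g.RA + 8 ≤ 0x800000)
    (hs : Mem.SameExcept (ownWins g) m m') (k n : Nat) (hn : n ≤ k) (hk : k ≤ 848)
    (hoff : (848 ≤ k - n ∨ k ≤ 248) ∧ (224 ≤ k - n ∨ k ≤ 220) ∧ (192 ≤ k - n ∨ k ≤ 188) ∧ (160 ≤ k - n ∨ k ≤ 156) ∧ (104 ≤ k - n ∨ k ≤ 100) ∧
      (88 ≤ k - n ∨ k ≤ 84)) :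
    m'.readLE (g.e.reg .rsp - UInt64.ofNat k) n = m.readLE (g.e.reg .rsp - UInt64.ofNat k) n := by
  have e := toNat_slot6 g hroom.1 k hk
  apply hs.readLE
  · rw [e]
    omega
  · intro w hw
    rw [e]
    simp only [ownWins, List.mem_cons, List.mem_nil_iff, or_false] at hw
    rcases hw with rfl | rfl | rfl | rfl | rfl | rfl <;> simp only [] <;> omega

/-- A span that does not meet the stack region misses every window of `ownWins`. -/
theorem ownWins_off (g : G) (hroom : 0x700000 + 848 ≤ g.RA ∧ g.RA + 8 ≤ 0x800000) {lo hi : Nat}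
    (h : hi ≤ 0x700000 ∨ 0x800000 ≤ lo) : ∀ w, w ∈ ownWins g → hi ≤ w.lo ∨ w.hi ≤ lo := by
  intro w hw
  have := ownWins_stack g hroom.1 w hw
  omega

/-- **COMMON is kept by stores into the own frame's scratch windows** (`ownWins`): the frame facts FR read slots outside the
windows; the footprint grows inside its stack window; the shadow, `*f`, the temp block, the configuration lie off the stack.
The registers and the two state facts are the walker's. -/
theorem common_of_stack {u₀ : State} {g : G} (he : Entered u₀ g) {v v' : State} (c : Common u₀ g v)
    (hs : Mem.SameExcept (ownWins g) v.mem v'.mem)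
    (rbp : v'.reg .rbp = g.e.reg .rsp - 8) (rsp : v'.reg .rsp = g.e.reg .rsp - 248)
    (code : CodeOK u₀ v'.mem) (inv : abiInv v') : Common u₀ g v' := by
  have hroom := he.room
  have hob : g.Blk (objBlock g.f) := he.vorbis.obj
  have hobst := he.pre.free.offStack _ hob
  have hobin := he.pre.env.ok.inside _ hob
  simp only [vblock, voff] at hobst hobin
  -- a slot outside the windows
  have rd : ∀ (k n : Nat), n ≤ k → k ≤ 848 →
      ((848 ≤ k - n ∨ k ≤ 248) ∧ (224 ≤ k - n ∨ k ≤ 220) ∧ (192 ≤ k - n ∨ k ≤ 188) ∧ (160 ≤ k - n ∨ k ≤ 156) ∧ (104 ≤ k - n ∨ k ≤ 100) ∧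
        (88 ≤ k - n ∨ k ≤ 84)) →
      v'.mem.readLE (g.e.reg .rsp - UInt64.ofNat k) n = v.mem.readLE (g.e.reg .rsp - UInt64.ofNat k) n :=
    fun k n hn hk hoff => stack_read hroom hs k n hn hk hoff
  -- a span of `*f` is off the windows
  have offObj : ∀ lo hi : Nat, g.f ≤ lo → hi ≤ g.f + 1808 → ∀ w, w ∈ ownWins g → hi ≤ w.lo ∨ w.hi ≤ lo := by
    intro lo hi h1 h2
    exact ownWins_off g hroom (by omega)
  apply Common.of_frame he rbp rsp code inv
  · exact (congrArg UInt64.ofNat (rd 8 8 (by omega) (by omega) (by omega))).trans c.s_rbp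
  · exact (congrArg UInt64.ofNat (rd 16 8 (by omega) (by omega) (by omega))).trans c.s_r15
  · exact (congrArg UInt64.ofNat (rd 24 8 (by omega) (by omega) (by omega))).trans c.s_r14
  · exact (congrArg UInt64.ofNat (rd 32 8 (by omega) (by omega) (by omega))).trans c.s_r13
  · exact (congrArg UInt64.ofNat (rd 40 8 (by omega) (by omega) (by omega))).trans c.s_r12
  · exact (congrArg UInt64.ofNat (rd 48 8 (by omega) (by omega) (by omega))).trans c.s_rbx
  · exact (congrArg UInt64.ofNat (rd 184 8 (by omega) (by omega) (by omega))).trans c.fr_f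
  · exact (congrArg UInt64.ofNat (rd 216 8 (by omega) (by omega) (by omega))).trans c.fr_rb
  · exact (rd 156 4 (by omega) (by omega) (by omega)).trans c.fr_ch
  · exact (rd 196 4 (by omega) (by omega) (by omega)).trans c.fr_prd
  · exact (rd 200 4 (by omega) (by omega) (by omega)).trans c.fr_w
  · exact (rd 232 4 (by omega) (by omega) (by omega)).trans c.fr_rtype
  · exact (rd 176 8 (by omega) (by omega) (by omega)).trans c.fr_pcd
  · exact (rd 240 8 (by omega) (by omega) (by omega)).trans c.fr_si
  · -- the footprint: the windows lie inside its stack window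
    apply c.same.trans
    apply hs.mono
    intro w hw a h1 h2
    have hw' := ownWins_stack g hroom.1 w hw
    refine ⟨⟨(g.e.reg .rsp).toNat - 848, (g.e.reg .rsp).toNat⟩, ?_, ?_, ?_⟩
    · unfold Spec.footprint
      exact List.mem_cons_self ..
    · show (g.e.reg .rsp).toNat - 848 ≤ a
      have e : (g.e.reg .rsp).toNat = g.RA := rfl
      omega
    · show a < (g.e.reg .rsp).toNat
      have e : (g.e.reg .rsp).toNat = g.RA := rfl
      omega
  · -- the shadow layer: no shadow byte is on the stack
    apply c.shadow.untouched
    exact hs.eqOn _ _ (ownWins_off g hroom (by omega))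
  · -- Bits: the four windows of `*f` it reads
    apply c.point.vorbis.bits.frame_fields
    apply Bits.SameFields.of_sameExcept hs
    · exact offObj _ _ (by omega) (by omega)
    · exact offObj _ _ (by omega) (by omega)
    · exact offObj _ _ (by omega) (by omega)
    · exact offObj _ _ (by omega) (by omega)
  · -- ADOBusy: the arena fields of `*f`
    have hb : ADOBusy g.A' g.others' v.mem g.f g.sz := c.point.busy
    apply hb.transfer
    apply ObjEq.of_sameExcept hs
    · intro w hw
      have := (by decide : WinsBelow ADO.wins 1808) w hw
      omega
    · intro w hw s hsp
      have hb' := (by decide : WinsBelow ADO.wins 1808) w hw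
      have hw1 : w.1 ≤ w.2 ∨ w.2 ≤ w.1 := by omega
      exact offObj (g.f + w.1) (g.f + w.2) (by omega) (by omega) s hsp
  · -- TB: the temp block lies in the arena, off the stack
    have hb : ADOBusy g.A' g.others' v.mem g.f g.sz := c.point.busy
    have ht := hb.ok.tblock_off c.tblock
    have hsz := c.tb.size
    have h3 : g.C * (8 + 8 * g.PRD) = g.C * 8 + g.C * (8 * g.PRD) := Nat.mul_add _ _ _
    apply c.tb.frame
    apply Block.Kept.of_sameExcept hs
    · intro w hw
      have := ownWins_off g hroom (lo := g.TB.base) (hi := g.TB.base + g.TB.size) (by omega) w hw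
      simp only []
      omega
    · simp only []
      omega
  · -- μ reads `*f` only
    have e : mu v'.mem g.f = mu v.mem g.f := by
      apply mu_frame (by omega)
      · exact hs.eqOn _ _ (offObj _ _ (by omega) (by omega))
      · exact hs.eqOn _ _ (offObj _ _ (by omega) (by omega))
      · exact hs.eqOn _ _ (offObj _ _ (by omega) (by omega))
      · exact hs.eqOn _ _ (offObj _ _ (by omega) (by omega))
    rw [e]
    exact c.mu_le

/-- **`cdq ; idiv` of a small non-negative dividend by a small positive divisor does not fault** and gives the unsigned quotient
and remainder (bit-vector form, closed: `bv_decide`). -/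
theorem idiv_small (z d : BitVec 32) (hz : z ≤ 8192#32) (hd1 : 1#32 ≤ d) (hd : d ≤ 16#32) :
    Alu.div true (if z.msb = true then BitVec.allOnes 32 else 0) z d = some (z / d, z % d) := by
  have h0 : (d == 0) = false := by bv_decide
  have hm : z.msb = false := by bv_decide
  have h1 : (((((0 : BitVec 32) ++ z).sdiv (d.signExtend (32 + 32))).setWidth 32).signExtend (32 + 32) !=
      ((0 : BitVec 32) ++ z).sdiv (d.signExtend (32 + 32))) = false := by bv_decide
  have h2 : (((0 : BitVec 32) ++ z).sdiv (d.signExtend (32 + 32))).setWidth 32 = z / d := by bv_decide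
  have h3 : (((0 : BitVec 32) ++ z).srem (d.signExtend (32 + 32))).setWidth 32 = z % d := by bv_decide
  unfold Alu.div
  simp only [hm, h0, Bool.false_eq_true, if_false, h1]
  rw [h2, h3]
  exact if_pos trivial

/-- The same over numbers: the dividend `z ≤ 8192` and the divisor `1 ≤ d ≤ 16` as 32-bit vectors. -/
theorem idiv_nat (z d : Nat) (hz : z ≤ 8192) (hd1 : 1 ≤ d) (hd : d ≤ 16) :
    Alu.div true (if (BitVec.ofNat 32 z).msb = true then BitVec.allOnes 32 else 0) (BitVec.ofNat 32 z) (BitVec.ofNat 32 d) =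
      some (BitVec.ofNat 32 (z / d), BitVec.ofNat 32 (z % d)) := by
  have ez : (BitVec.ofNat 32 z).toNat = z := by
    rw [BitVec.toNat_ofNat]
    exact Nat.mod_eq_of_lt (by omega)
  have ed : (BitVec.ofNat 32 d).toNat = d := by
    rw [BitVec.toNat_ofNat]
    exact Nat.mod_eq_of_lt (by omega)
  have hq : z / d ≤ z := Nat.div_le_self _ _
  have hr : z % d < d := Nat.mod_lt _ (by omega)
  rw [idiv_small]
  · congr 1
    congr 1
    · apply BitVec.eq_of_toNat_eq
      rw [BitVec.toNat_udiv, ez, ed, BitVec.toNat_ofNat]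
      exact (Nat.mod_eq_of_lt (by omega)).symm
    · apply BitVec.eq_of_toNat_eq
      rw [BitVec.toNat_umod, ez, ed, BitVec.toNat_ofNat]
      exact (Nat.mod_eq_of_lt (by omega)).symm
  · rw [BitVec.le_def, ez]
    exact hz
  · rw [BitVec.le_def, ed]
    exact hd1
  · rw [BitVec.le_def, ed]
    exact hd

/-- **A field of the record `r`** (`r + off`, `n` bytes inside the 32-byte record): a check site, in the live set inside the
function (R2 + P1). -/
theorem rec_site {u₀ : State} {g : G} (he : Entered u₀ g) {v : State} (c : Common u₀ g v) (off n : Nat)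
    (hoff : off + n ≤ 32) (hn : 1 ≤ n) : Site g.Live' (g.r + off) n := by
  have hr : ResidueOK g.Blk v.mem g.f := c.point.vorbis.residue
  apply hr.site_record c.point.env.live (c.rn_lt he) off n _ hn
  · rw [c.config_at]
  · simp only [voff]
    omega

/-- **Where the record is**: in the data space, off the stack region (R2, `BlkOK`, `BlkFree.offStack`). -/
theorem rec_where {u₀ : State} {g : G} (he : Entered u₀ g) :
    0x100000 ≤ g.r ∧ g.r + 32 ≤ 0xC00000 ∧ (g.r + 32 ≤ 0x700000 ∨ 0x800000 ≤ g.r) := by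
  have hR : ResidueOK g.Blk g.e.mem g.f := he.vorbis.residue
  have h2 := hR.R2
  have hin := he.pre.env.ok.inside _ h2
  have hst := he.pre.free.offStack _ h2
  have hlt := he.args.rn_lt
  have h1 := hR.R1
  have hlt' : g.rn < (stb_vorbis.residue_count g.e.mem g.f).toNat := by omega
  have er : g.r = stb_vorbis.residue_config g.e.mem g.f + 32 * g.rn := by
    unfold G.r stb_vorbis.residue_config_at
    simp only [voff]
  simp only [voff] at hin hst
  omega

/-- **The bounds of the arguments**: `n ≤ 4096` (P1 + HD3), `ch ≤ C ≤ 16` (P2 + HD1). -/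
theorem arg_bounds {u₀ : State} {g : G} (he : Entered u₀ g) : g.n ≤ 4096 ∧ g.ch ≤ g.C ∧ g.C ≤ 16 := by
  have hh := he.vorbis.header
  obtain ⟨a, b, h6, hab, hb, e0, e1⟩ := hh.HD3
  have h1 := hh.HD1
  have hn := he.args.n_le
  have hc := he.args.ch_le
  have hp : 2 ^ b ≤ 2 ^ 13 := Nat.pow_le_pow_right (by decide) hb
  have eb : bsize g.e.mem g.f 1 = 2 ^ b := by
    unfold bsize
    rw [if_neg (by decide), e1]
    exact Int.toNat_natCast _
  have eC : g.C = (stb_vorbis.channels g.e.mem g.f).toNat := rfl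
  refine ⟨?_, hc, ?_⟩
  · rw [eb] at hn
    omega
  · omega

/-- **Fact K on path A** in the memory of a cut point: for `pc < part_read`, `1 ≤ part_size` (R5) and
`z(pc) + part_size ≤ n·ch`, `≤ 8192` (so neither the 32-bit `imul` / `add` nor the `idiv` overflows). -/
theorem factK_A {u₀ : State} {g : G} (he : Entered u₀ g) {v : State} (c : Common u₀ g v) (h2 : g.rtype = 2)
    (hch : 2 ≤ g.ch) {pc : Nat} (hpc : pc < g.PRD) :
    1 ≤ Residue.part_size v.mem g.r ∧
    Residue.begin v.mem g.r + pc * Residue.part_size v.mem g.r + Residue.part_size v.mem g.r ≤ g.n * g.ch ∧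
    Residue.begin v.mem g.r + pc * Residue.part_size v.mem g.r + Residue.part_size v.mem g.r ≤ 8192 := by
  have hres := c.resAt he
  have hb := arg_bounds he
  have e := c.prd
  rw [h2] at e
  have hK := Residue.factK hres (A := Res.actualDec 2 g.n) (pc := pc) (by rw [e]; exact hpc)
  have ha := Res.actualDec_le 2 g.n
  refine ⟨hres.R5.1, ?_, by omega⟩
  apply Residue.factK_pos hres hch
  rw [e]
  exact hpc

/-- Every allocated block is kept by stores into `ownWins` (no allocated block meets the stack region). -/
theorem blks_kept_of_stack {u₀ : State} {g : G} (he : Entered u₀ g) {m m' : Mem} (hs : Mem.SameExcept (ownWins g) m m') :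
    AllKept g.Blk m m' := by
  apply AllKept.of_sameExcept he.pre.env.ok hs
  intro B hB
  exact ownWins_off g he.room (he.pre.free.offStack B hB)

/-- The temp block is kept by stores into `ownWins` (it lies in the arena, off the stack). -/
theorem tb_kept_of_stack {u₀ : State} {g : G} (he : Entered u₀ g) {v : State} (c : Common u₀ g v) {m' : Mem}
    (hs : Mem.SameExcept (ownWins g) v.mem m') : g.TB.Kept v.mem m' := by
  have hb : ADOBusy g.A' g.others' v.mem g.f g.sz := c.point.busy
  have ht := hb.ok.tblock_off c.tblock
  apply Block.Kept.of_sameExcept hs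
  · exact ownWins_off g he.room (by omega)
  · omega

/-- The record's reads are kept by stores into `ownWins`. -/
theorem reads_of_stack {u₀ : State} {g : G} (he : Entered u₀ g) {v : State} (c : Common u₀ g v) {m' : Mem}
    (hs : Mem.SameExcept (ownWins g) v.mem m') : ResidueReads v.mem g.f m' g.f g.r := by
  have hroom := he.room
  have hak := blks_kept_of_stack he hs
  have hob : g.Blk (objBlock g.f) := he.vorbis.obj
  have hobst := he.pre.free.offStack _ hob
  have hobin := he.pre.env.ok.inside _ hob
  simp only [vblock, voff] at hobst hobin
  have hv : Real.VorbisOK g.len g.Blk v.mem g.f := c.point.vorbis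
  have hcfg := hv.config
  have hR : ResidueOK g.Blk v.mem g.f := hv.residue
  have hres := c.resAt he
  apply ResidueReads.of_kept
  · apply ObjEq.of_sameExcept hs
    · intro w hw
      have := (by decide : WinsBelow ResidueAtOK.wins 1808) w hw
      omega
    · intro w hw s hsp
      have hb' := (by decide : WinsBelow ResidueAtOK.wins 1808) w hw
      exact ownWins_off g hroom (lo := g.f + w.1) (hi := g.f + w.2) (by omega) s hsp
  · -- the record lies in the `residue_config` block
    have hlt := c.rn_lt he
    have h1 := hR.R1
    have hlt' : g.rn < (stb_vorbis.residue_count v.mem g.f).toNat := by omega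
    have er := c.config_at
    apply (hak _ hR.R2).mono
    · show stb_vorbis.residue_config v.mem g.f ≤ g.r
      rw [← er]
      unfold stb_vorbis.residue_config_at
      omega
    · show g.r + Off.sizeof.Residue ≤
        stb_vorbis.residue_config v.mem g.f + Off.sizeof.Residue * (stb_vorbis.residue_count v.mem g.f).toNat
      rw [← er]
      unfold stb_vorbis.residue_config_at
      simp only [voff]
      omega
  · -- the class book's header lies in the codebooks block
    have h7 := hres.R7
    have hlt' : Residue.classbook v.mem g.r < (stb_vorbis.codebook_count v.mem g.f).toNat := by omega
    apply (hak _ hcfg.cb0.F2).mono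
    · show stb_vorbis.codebooks v.mem g.f ≤ Residue.cbk v.mem g.f g.r
      unfold Residue.cbk stb_vorbis.codebooks_at
      omega
    · show Residue.cbk v.mem g.f g.r + 8 ≤
        stb_vorbis.codebooks v.mem g.f + Off.sizeof.Codebook * (stb_vorbis.codebook_count v.mem g.f).toNat
      unfold Residue.cbk stb_vorbis.codebooks_at
      simp only [voff]
      omega

/-- FILL of a row of the temp block is kept by stores into `ownWins`. -/
theorem fill_of_stack {u₀ : State} {g : G} (he : Entered u₀ g) {v : State} (c : Common u₀ g v) {m' : Mem}
    (hs : Mem.SameExcept (ownWins g) v.mem m') {j m : Nat} (hj : j < g.C) (hm : m ≤ g.PRD)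
    (h : Fill v.mem g.f g.r g.TB g.C g.PRD j m) : Fill m' g.f g.r g.TB g.C g.PRD j m := by
  apply h.frame hj hm c.tb.size (tb_kept_of_stack he c hs) (reads_of_stack he c hs)
  exact blks_kept_of_stack he hs _ (c.resAt he).R8a

/-- WA is kept by stores into `ownWins` (`3 ≤ ch ≤ C`: row 0 exists). -/
theorem winv_of_stack {u₀ : State} {g : G} (he : Entered u₀ g) {v : State} (c : Common u₀ g v) {m' : Mem}
    (hs : Mem.SameExcept (ownWins g) v.mem m') (hC : 1 ≤ g.C) {pass cs pcount : Nat}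
    (h : WInv v.mem g.f g.r g.TB g.C g.PRD g.W g.rowsA pass cs pcount) :
    WInv m' g.f g.r g.TB g.C g.PRD g.W g.rowsA pass cs pcount := by
  apply h.frame (fun j hj => hj) _ (c.w_pos he)
  intro j m hj hf hm
  have e : j = 0 := hj
  exact fill_of_stack he c hs (by omega) hm hf

/-- The invariant of the i-loop is kept by stores into `ownWins`. -/
theorem winner_of_stack {u₀ : State} {g : G} (he : Entered u₀ g) {v : State} (c : Common u₀ g v) {m' : Mem}
    (hs : Mem.SameExcept (ownWins g) v.mem m') (hC : 1 ≤ g.C) {pass cs i pcount : Nat}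
    (h : WInnerInv v.mem g.f g.r g.TB g.C g.PRD g.W g.rowsA pass cs i pcount) :
    WInnerInv m' g.f g.r g.TB g.C g.PRD g.W g.rowsA pass cs i pcount := by
  apply h.frame (fun j hj => hj) _ (c.w_pos he)
  intro j m hj hf hm
  have e : j = 0 := hj
  exact fill_of_stack he c hs (by omega) hm hf

/-- `part_read ≤ actual_size ≤ 2·n ≤ 8192`. -/
theorem prd_le {u₀ : State} {g : G} (he : Entered u₀ g) : g.PRD ≤ 8192 := by
  have hb := arg_bounds he
  have ha := Res.actualDec_le (stb_vorbis.residue_types g.e.mem g.f g.rn) g.n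
  have h := Res.partRead_le (Residue.begin g.e.mem g.r) (Residue.end_ g.e.mem g.r) (Residue.part_size g.e.mem g.r)
    (Res.actualDec (stb_vorbis.residue_types g.e.mem g.f g.rn) g.n)
  have e : g.PRD = Res.partRead (Residue.begin g.e.mem g.r) (Residue.end_ g.e.mem g.r) (Residue.part_size g.e.mem g.r)
    (Res.actualDec (stb_vorbis.residue_types g.e.mem g.f g.rn) g.n) := rfl
  omega

/-- The low half of the word of a small number. -/
theorem seg6b_part32_ofNat (n : Nat) (h : n < 2 ^ 32) : Word.part Width.w32 (UInt64.ofNat n) = BitVec.ofNat 32 n := by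
  apply BitVec.eq_of_toNat_eq
  rw [Asan.part32_toNat, UInt64.toNat_ofNat', BitVec.toNat_ofNat, Nat.mod_eq_of_lt (by omega : n < 2 ^ 64)]

/-- **`z = r->begin + pcount * r->part_size`** as the walker computes it (`imul eax, …` ; `add eax, ebx`): the 32-bit vector of
the number (no bound is needed: `BitVec.ofNat` is a ring homomorphism). -/
theorem z32 (pcount psz bg : Nat) (h : pcount < 2 ^ 32) :
    Word.part Width.w32 (UInt64.ofNat pcount) * BitVec.ofNat 32 psz + BitVec.ofNat 32 bg =
      BitVec.ofNat 32 (bg + pcount * psz) := by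
  rw [seg6b_part32_ofNat pcount h, ← BitVec.ofNat_mul, ← BitVec.ofNat_add, Nat.add_comm]

/-- The signed value of a small number's 32-bit vector. -/
theorem toInt_small32 (n : Nat) (h : n < 2 ^ 31) : (BitVec.ofNat 32 n).toInt = (n : Int) := by
  have e : (BitVec.ofNat 32 n).toNat = n := by
    rw [BitVec.toNat_ofNat]
    exact Nat.mod_eq_of_lt (by omega)
  rw [toInt_of_lt _ (by omega), e]

/-- The word of a stack address `RA − k`. -/
theorem addr_slot (g : G) (hroom : 0x700000 + 848 ≤ g.RA) (k : Nat) (hk : k ≤ 848) :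
    addr (g.RA - k) = g.e.reg .rsp - UInt64.ofNat k :=
  (eq_addr _ _ (toNat_slot6 g hroom k hk)).symm

/-- `PathA` (the pass, `tap` and `n` slots) is kept by stores into `ownWins`. -/
theorem patha_of_stack {u₀ : State} {g : G} (he : Entered u₀ g) {v v' : State} (hs : Mem.SameExcept (ownWins g) v.mem v'.mem)
    {pass : Nat} (p : PathA g pass v) : PathA g pass v' := by
  have hroom := he.room
  refine ⟨p.rtype2, p.ch_ge, p.pass_le, ?_, ?_, ?_⟩
  · exact (stack_read hroom hs 168 4 (by omega) (by omega) (by omega)).trans p.sl_pass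
  · exact (stack_read hroom hs 228 4 (by omega) (by omega) (by omega)).trans p.sl_tap
  · exact (stack_read hroom hs 208 4 (by omega) (by omega) (by omega)).trans p.sl_n

/-- **CI from the two ints just stored**: `c_inter = z % ch`, `p_inter = z / ch` read back from the frame, `z ≤ n·ch`. -/
theorem inter_of_z {u₀ : State} {g : G} (he : Entered u₀ g) {m : Mem} {z : Nat} (hch : 1 ≤ g.ch) (hz : z ≤ g.n * g.ch)
    (hz31 : z < 2 ^ 31)
    (hc : m.readLE (g.e.reg .rsp - 104) 4 = z % g.ch) (hp : m.readLE (g.e.reg .rsp - 88) 4 = z / g.ch) :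
    InterAt m g.ci g.pi g.ch g.n := by
  have hroom := he.room
  have hq : z / g.ch ≤ z := Nat.div_le_self _ _
  have hr : z % g.ch ≤ z := Nat.mod_le _ _
  apply InterAt.of_z hch hz
  · unfold Mem.i32 Mem.u32 G.ci
    rw [addr_slot g hroom.1 104 (by omega)]
    show sint32 (m.readLE (g.e.reg .rsp - 104) 4) = _
    rw [hc]
    unfold sint32
    rw [if_pos (by omega)]
  · unfold Mem.i32 Mem.u32 G.pi
    rw [addr_slot g hroom.1 88 (by omega)]
    show sint32 (m.readLE (g.e.reg .rsp - 88) 4) = _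
    rw [hp]
    unfold sint32
    rw [if_pos (by omega)]

/-- 0x10f628: `idiv DWORD PTR [rbp-0x94]` of the `b < 0` arm (C 2243). -/
abbrev idivArm : Word := Vorbis.L.decode_residue.cut22 - 36

/-- The `setl` / `test` pair of a signed comparison: the byte is 0 iff the comparison fails. -/
theorem setl_zero (a b : Int) : (if a < b then (1 : BitVec 8) else 0).toNat = 0 ↔ ¬ a < b := by
  split
  · simp_all
  · simp_all

/-- `classwords` is the value of an `int`: below 2^31. -/
theorem w_lt (g : G) : g.W < 2 ^ 31 := by
  have e : g.W = (sint32 (g.e.mem.u32 (Residue.cbk g.e.mem g.f g.r + Off.Codebook.dimensions))).toNat := rfl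
  rcases sint32_cases (g.e.mem.u32 (Residue.cbk g.e.mem g.f g.r + Off.Codebook.dimensions)) with ⟨h1, h2⟩ | ⟨h1, h2⟩
  · rw [e, h2]
    omega
  · have hlt : g.e.mem.u32 (Residue.cbk g.e.mem g.f g.r + Off.Codebook.dimensions) < 2 ^ 32 := by
      unfold Mem.u32
      exact Mem.readLE_lt _ _ 4
    rw [e, h2]
    omega

/-- **`&c_inter` and `&p_inter` are check sites** (the objects of the own protected frame, `base + 48` and `base + 64` with
`base = RA − 152`): `DeintPre.cpSite`, `DeintPre.ppSite` of the call at 0x10f538. `hroom`: `Entered.room`. -/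
theorem ints_site {u₀ : State} {g : G} (he : Entered u₀ g) {v : State} (c : Common u₀ g v) :
    Site g.Live' g.ci 4 ∧ Site g.Live' g.pi 4 := by
  have hroom := he.room
  have hF : (g.RA - 152, Vorbis.Frames.decode_residue) ∈ g.frames' := List.mem_cons_self ..
  constructor
  · have ho : (⟨g.RA - 152 + 48, 4, .stack⟩ : Obj) ∈ Vorbis.Frames.decode_residue.objsAt (g.RA - 152) := by
      unfold FrameLayout.objsAt Vorbis.Frames.decode_residue
      simp only [List.map_cons, List.mem_cons, true_or]
    have hl := c.shadow.live_frame hF ho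
    apply Site.of_block hl
    · show g.RA - 152 + 48 ≤ g.ci
      unfold G.ci
      omega
    · show g.ci + 4 ≤ g.RA - 152 + 48 + 4
      unfold G.ci
      omega
    · omega
  · have ho : (⟨g.RA - 152 + 64, 4, .stack⟩ : Obj) ∈ Vorbis.Frames.decode_residue.objsAt (g.RA - 152) := by
      unfold FrameLayout.objsAt Vorbis.Frames.decode_residue
      simp only [List.map_cons, List.mem_cons, true_or, or_true]
    have hl := c.shadow.live_frame hF ho
    apply Site.of_block hl
    · show g.RA - 152 + 64 ≤ g.pi
      unfold G.pi
      omega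
    · show g.pi + 4 ≤ g.RA - 152 + 64 + 4
      unfold G.pi
      omega
    · omega

/-- **The table `residue_buffers[0 .. ch)` is a check site** in the live set inside the function (`DeintPre.table`; the load8 of
`residue_buffers[j]`): P2's `rb_live`, the live lists have grown. -/
theorem rb_site {u₀ : State} {g : G} (he : Entered u₀ g) (hch : 1 ≤ g.ch) : Site g.Live' g.rb (8 * g.ch) := by
  have hl : LiveIn g.others' g.frames' g.rb (8 * g.ch) := by
    apply he.args.rb_live.mono
    intro o ho
    unfold G.frames' G.others'
    rw [stackObjs_cons]
    rcases List.mem_append.mp ho with h | h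
    · exact List.mem_append_left _ (List.mem_append_right _ h)
    · exact List.mem_append_right _ (List.mem_cons_of_mem _ h)
  exact (LiveBytes.of_liveIn hl).site g.rb (8 * g.ch) (Nat.le_refl _) (Nat.le_refl _) (by omega)

/-- **`∀ k < ch: outputs[k] = NULL ∨ Block(outputs[k], ≥ 4·n)`** (`DeintPre.outs` of the call at 0x10f538) in any memory that
differs from the entry memory inside the footprint only: P2 (`Args.null`, `Args.buf`: a channel buffer `Block(·, 4·b1)`,
`2·n ≤ b1`), the caller's array read as at the entry (`Entered.reads`). -/
theorem outs_of {u₀ : State} {g : G} (he : Entered u₀ g) {m : Mem}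
    (hsame : Mem.SameExcept (g.spec.footprint g.e) g.e.mem m) :
    ∀ k, k < g.ch → m.ptr (g.rb + 8 * k) = 0 ∨ ∃ sz, 4 * g.n ≤ sz ∧ g.Blk ⟨m.ptr (g.rb + 8 * k), sz⟩ := by
  intro k hk
  have hrb := (he.reads hsame).2.2 k hk
  have hargs := he.args
  by_cases hd : DND g.e.mem g.dnd k
  · left
    rw [hrb]
    exact hargs.null k hk hd
  · right
    obtain ⟨c, hc, hptr, _⟩ := hargs.buf k hk hd
    have hn := hargs.n_le
    refine ⟨4 * bsize g.e.mem g.f 1, by omega, ?_⟩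
    rw [hrb, hptr]
    exact SampleBuf.blk he.vorbis.config (SampleBuf.chan c hc)

/-- **A non-NULL output pointer is a channel buffer**: the window `outputs[k][0 .. n)` of the callee lies inside a sample buffer
of the ENTRY memory (so SEP of the entry memory keeps it apart from `*f` and from every configuration block, and it is a window
of `DecodeResidue.writes`). -/
theorem out_window {u₀ : State} {g : G} (he : Entered u₀ g) {m : Mem}
    (hsame : Mem.SameExcept (g.spec.footprint g.e) g.e.mem m) {k : Nat} (hk : k < g.ch)
    (hne : m.ptr (g.rb + 8 * k) ≠ 0) :
    ∃ c : Nat, c < nchan g.e.mem g.f ∧ m.ptr (g.rb + 8 * k) = stb_vorbis.channel_buffers g.e.mem g.f c ∧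
      4 * g.n ≤ 4 * bsize g.e.mem g.f 1 ∧
      SampleBuf g.Blk g.e.mem g.f ⟨stb_vorbis.channel_buffers g.e.mem g.f c, 4 * bsize g.e.mem g.f 1⟩ := by
  have hrb := (he.reads hsame).2.2 k hk
  have hargs := he.args
  by_cases hd : DND g.e.mem g.dnd k
  · exact absurd (hrb.trans (hargs.null k hk hd)) hne
  · obtain ⟨c, hc, hptr, _⟩ := hargs.buf k hk hd
    have hn := hargs.n_le
    have h1 := he.vorbis.header.HD1
    refine ⟨c, ?_, hrb.trans hptr, by omega, SampleBuf.chan c hc⟩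
    rw [nchan_def]
    omega

/-- **A channel buffer of the entry memory is a window of decode_residue's footprint** (the `List.range … map` part of
`DecodeResidue.writes`): with `out_window`, every NON-NULL window of the callee's footprint lies inside one of ours — what
`Common.same` after the call needs once the NULL windows are gone from `deint.wins` (the fix proposed in RESULT.json). -/
theorem chan_in_footprint {g : G} {c : Nat} (hc : c < nchan g.e.mem g.f) :
    (⟨stb_vorbis.channel_buffers g.e.mem g.f c, stb_vorbis.channel_buffers g.e.mem g.f c + 4 * bsize g.e.mem g.f 1⟩ : Span) ∈
      g.spec.footprint g.e := by
  unfold Spec.footprint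
  apply List.mem_cons_of_mem
  show _ ∈ DecodeResidue.writes g.A g.e
  unfold DecodeResidue.writes
  apply List.mem_append_right
  exact List.mem_map.mpr ⟨c, List.mem_range.mpr hc, rfl⟩


/-- **A non-NULL output pointer is a channel buffer of the PRESENT memory** `m` (a memory that differs from the entry memory inside
the footprint only): `channels`, `channel_buffers[c]`, `blocksize_1` read as at the entry (`DecodeSame`). -/
theorem out_window_m {u₀ : State} {g : G} (he : Entered u₀ g) {m : Mem}
    (hsame : Mem.SameExcept (g.spec.footprint g.e) g.e.mem m) (hd : DecodeSame g.f g.e.mem m) {k : Nat} (hk : k < g.ch)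
    (hne : m.ptr (g.rb + 8 * k) ≠ 0) :
    ∃ c : Nat, m.ptr (g.rb + 8 * k) = stb_vorbis.channel_buffers m g.f c ∧ 4 * g.n ≤ 4 * bsize m g.f 1 ∧
      SampleBuf g.Blk m g.f ⟨stb_vorbis.channel_buffers m g.f c, 4 * bsize m g.f 1⟩ := by
  obtain ⟨c, hc, hptr, hn, _⟩ := out_window he hsame hk hne
  have h16 := (arg_bounds he).2.2
  have hc16 : c < 16 := by
    have e : g.C = nchan g.e.mem g.f := rfl
    omega
  have ech : stb_vorbis.channels m g.f = stb_vorbis.channels g.e.mem g.f := by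
    simp only [vacc, voff]
    exact hd.i32 4 (by decide)
  have ecb : stb_vorbis.channel_buffers m g.f c = stb_vorbis.channel_buffers g.e.mem g.f c := by
    simp only [vacc, voff]
    exact hd.u64_elem 144 1000 (by decide) 872 c (by omega) (by omega)
  have eb1 : stb_vorbis.blocksize_1 m g.f = stb_vorbis.blocksize_1 g.e.mem g.f := by
    simp only [vacc, voff]
    exact hd.i32 156 (by decide)
  have ebs : bsize m g.f 1 = bsize g.e.mem g.f 1 := by
    rw [bsize_one, bsize_one, eb1]
  refine ⟨c, ?_, ?_, ?_⟩
  · rw [ecb]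
    exact hptr
  · rw [ebs]
    exact hn
  · apply SampleBuf.chan c
    rw [ech]
    rw [nchan_def] at hc
    have h1 := he.vorbis.header.HD1
    omega

/-- **`DeintApart` at the call 0x10f538** (`DeintPre.apart`), in the memory `m` of the callee's entry: the two ints are the objects
of the own frame (`RA − 104`, `RA − 88`: off `*f`, which is off the stack); a non-NULL output window is a prefix of a channel
buffer: SEP keeps it apart from `*f`, from the codebooks block, from every `sorted_values` block; it is off the stack, where the
table and the two ints are. -/
theorem deintApart_of {u₀ : State} {g : G} (he : Entered u₀ g) {m : Mem}
    (hsame : Mem.SameExcept (g.spec.footprint g.e) g.e.mem m) (hbits : Bits g.Blk g.len m g.f) {b : Nat}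
    (hb : (b : Int) < stb_vorbis.codebook_count m g.f) :
    DeintApart m g.f (stb_vorbis.codebooks_at m g.f b) g.rb g.ch g.ci g.pi g.n := by
  obtain ⟨hv, hsep, hd⟩ := he.frame hsame hbits
  have hcfg := hv.config
  have hroom := he.room
  have hob : g.Blk (objBlock g.f) := he.vorbis.obj
  have hobst := he.pre.free.offStack _ hob
  simp only [vblock, voff] at hobst
  have hrbst := he.args.rb_stack
  have eRA : g.RA = (g.e.reg .rsp).toNat := rfl
  -- a non-NULL window: inside a channel buffer, which is an allocated block off the stack
  have hwin : ∀ k, k < g.ch → m.ptr (g.rb + 8 * k) ≠ 0 →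
      ∃ C : Block, SampleBuf g.Blk m g.f C ∧ C.base = m.ptr (g.rb + 8 * k) ∧ 4 * g.n ≤ C.size ∧
        (C.base + C.size ≤ 0x700000 ∨ 0x800000 ≤ C.base) := by
    intro k hk hne
    obtain ⟨c, hptr, hn, hC⟩ := out_window_m he hsame hd hk hne
    refine ⟨_, hC, hptr.symm, hn, ?_⟩
    exact he.pre.free.offStack _ (SampleBuf.blk hcfg hC)
  refine ⟨?_, ?_, ?_, ?_, ?_, ?_, ?_, ?_, ?_, he.deint_tableObj⟩
  · show g.ci + 4 ≤ g.pi ∨ g.pi + 4 ≤ g.ci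
    unfold G.ci G.pi
    omega
  · simp only [vblock, voff]
    unfold G.ci
    omega
  · simp only [vblock, voff]
    unfold G.pi
    omega
  · intro k hk hne
    obtain ⟨C, hC, e1, e2, _⟩ := hwin k hk hne
    have hdj := hsep.bufobj C hC
    unfold deint.window
    simp only [vblock, voff] at hdj ⊢
    omega
  · intro k hk hne
    obtain ⟨C, hC, e1, e2, _⟩ := hwin k hk hne
    have hdj := hsep.buf _ ConfigOK.Reads.codebooks C hC
    have hin := hcfg.cb0.cb_in b hb
    unfold deint.window
    simp only [vblock, voff] at hdj hin ⊢
    omega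
  · intro k hk hne hse
    obtain ⟨C, hC, e1, e2, _⟩ := hwin k hk hne
    have hdj := hsep.buf _ (ConfigOK.Reads.sorted_values b hb hse) C hC
    unfold deint.window
    simp only [vblock] at hdj ⊢
    omega
  · intro k hk hne
    obtain ⟨C, hC, e1, e2, e3⟩ := hwin k hk hne
    unfold deint.window
    simp only [vblock]
    omega
  · intro k hk hne
    obtain ⟨C, hC, e1, e2, e3⟩ := hwin k hk hne
    unfold deint.window
    simp only [vblock]
    unfold G.ci
    omega
  · intro k hk hne
    obtain ⟨C, hC, e1, e2, e3⟩ := hwin k hk hne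
    unfold deint.window
    simp only [vblock]
    unfold G.pi
    omega


/-- **THE PRECONDITION OF THE CALL at 0x10f538** (and of the one at 0x10f18e in decode_residue.4) from the assertions: `v` is the
last state with COMMON (its shadow layer), `s` the callee's first instruction: `rsp = RA − 272` (two pushes and the return
address below the steady stack pointer), `rdi = f`, `rsi = f->codebooks + b` with `b < codebook_count` (R8c), `rdx =
residue_buffers`, `ecx = ch`, `r8 = &c_inter`, `r9 = &p_inter`, `[rsp + 8] = n`, `[rsp + 16] = part_size ≥ 1`, CI; the memory of
`s` differs from the entry memory inside the footprint only and no shadow byte was written since `v`. -/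
theorem deintPre_of {u₀ : State} {g : G} (he : Entered u₀ g) {v s : State} (c : Common u₀ g v)
    (hsame : Mem.SameExcept (g.spec.footprint g.e) g.e.mem s.mem) (hbits : Bits g.Blk g.len s.mem g.f)
    (hun : ShadowUntouched v.mem s.mem) (hch3 : 3 ≤ g.ch)
    (hrsp : (s.reg .rsp).toNat = g.RA - 272) (hrdi : (s.reg .rdi).toNat = g.f) {b : Nat}
    (hb : (b : Int) < stb_vorbis.codebook_count s.mem g.f) (hrsi : (s.reg .rsi).toNat = stb_vorbis.codebooks_at s.mem g.f b)
    (hrdx : (s.reg .rdx).toNat = g.rb) (hrcx : argU32 (s.reg .rcx) = g.ch) (hr8 : (s.reg .r8).toNat = g.ci)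
    (hr9 : (s.reg .r9).toNat = g.pi) (hlen : s.mem.u32 (g.RA - 264) = g.n) (htot : 1 ≤ s.mem.i32 (g.RA - 256))
    (hinter : InterAt s.mem g.ci g.pi g.ch g.n) : DeintPre g.others' g.frames' g.Blk g.len s := by
  obtain ⟨hv, hsep, hd⟩ := he.frame hsame hbits
  have hcfg := hv.config
  have hroom := he.room
  have hal := he.entry.align
  have eRA : (g.e.reg .rsp).toNat = g.RA := rfl
  have hbnd := arg_bounds he
  have hsites := ints_site he c
  have hinv := c.shadow.untouched hun
  have e8 : (s.reg .rsp).toNat + 8 = g.RA - 264 := by omega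
  have e16 : (s.reg .rsp).toNat + 16 = g.RA - 256 := by omega
  have e24 : (s.reg .rsp).toNat + 24 = g.RA - 248 := by omega
  have hsh : ShadowPre g.others' g.frames' s := by
    refine ⟨?_, he.offText'⟩
    rw [e8]
    exact hinv.lower (by omega) (by omega) (by omega)
  refine ⟨⟨⟨hsh, ?_, ?_⟩, he.pre.env.ok, ?_, ?_, ?_⟩, ?_, ?_, ?_, ?_, ?_, ?_, ?_, ?_, ?_, ?_, ?_⟩
  · rw [hrdi]
    exact he.reader'
  · rw [hrdi]
    exact hbits
  · -- the struct at `c` lies inside the codebooks block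
    rw [hrsi]
    exact ⟨_, hcfg.cb0.F2, hcfg.cb0.cb_in b hb⟩
  · rw [hrsi]
    exact hcfg.books b hb
  · rw [hrdi, hrsi]
    exact he.bookApart hsame b hb
  · rw [e24]
    exact hinv
  · rw [hrcx]
    omega
  · rw [hrcx]
    omega
  · rw [e8, hlen]
    omega
  · rw [e16]
    exact htot
  · rw [hr8]
    exact hsites.1
  · rw [hr9]
    exact hsites.2
  · rw [hr8, hr9, hrcx, e8, hlen]
    exact hinter
  · rw [hrdx, hrcx]
    exact rb_site he (by omega)
  · rw [hrcx, hrdx, e8, hlen]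
    exact outs_of he hsame
  · rw [hrdi, hrsi, hrdx, hrcx, hr8, hr9, e8, hlen]
    exact deintApart_of he hsame hbits hb


/-- **The footprint, `Bits` and the shadow over stores into the own frame**, for a MEMORY (not a state: at the callee's first
instruction the stack pointer is not the steady one, so `common_of_stack` does not apply): the three hypotheses `hsame`, `hbits`,
`hun` of `deintPre_of` from COMMON at the last cut and the walker's `Mem.SameExcept (ownWins g) v.mem s.mem` (`u_same`). -/
theorem frame_of_stack {u₀ : State} {g : G} (he : Entered u₀ g) {v : State} (c : Common u₀ g v) {m : Mem}
    (hs : Mem.SameExcept (ownWins g) v.mem m) :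
    Mem.SameExcept (g.spec.footprint g.e) g.e.mem m ∧ Bits g.Blk g.len m g.f ∧ ShadowUntouched v.mem m := by
  have hroom := he.room
  have hob : g.Blk (objBlock g.f) := he.vorbis.obj
  have hobst := he.pre.free.offStack _ hob
  have hobin := he.pre.env.ok.inside _ hob
  simp only [vblock, voff] at hobst hobin
  have offObj : ∀ lo hi : Nat, g.f ≤ lo → hi ≤ g.f + 1808 → ∀ w, w ∈ ownWins g → hi ≤ w.lo ∨ w.hi ≤ lo := by
    intro lo hi h1 h2
    exact ownWins_off g hroom (by omega)
  refine ⟨?_, ?_, ?_⟩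
  · apply c.same.trans
    apply hs.mono
    intro w hw a h1 h2
    have hw' := ownWins_stack g hroom.1 w hw
    refine ⟨⟨(g.e.reg .rsp).toNat - 848, (g.e.reg .rsp).toNat⟩, ?_, ?_, ?_⟩
    · unfold Spec.footprint
      exact List.mem_cons_self ..
    · show (g.e.reg .rsp).toNat - 848 ≤ a
      have e : (g.e.reg .rsp).toNat = g.RA := rfl
      omega
    · show a < (g.e.reg .rsp).toNat
      have e : (g.e.reg .rsp).toNat = g.RA := rfl
      omega
  · apply c.point.vorbis.bits.frame_fields
    apply Bits.SameFields.of_sameExcept hs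
    · exact offObj _ _ (by omega) (by omega)
    · exact offObj _ _ (by omega) (by omega)
    · exact offObj _ _ (by omega) (by omega)
    · exact offObj _ _ (by omega) (by omega)
  · exact hs.eqOn _ _ (ownWins_off g hroom (by omega))

/-! ### The intermediate assertion, the stopping points and the bit-level lemmas of the body's front -/

/-- **Inside the body proper of the i-loop 2229, `b` in ebx**: `a` = 0x10f60e (`test bx, 0x8000`) or 0x10f4ed (the call arm: bit 15
of `b` clear). Everything of `AtTurn`; `[rbp−0xb8] = r->part_size`, `[rbp−0x98] = z = r->begin + pcount·part_size`; `ebx = b` as an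
unsigned 16-bit value, and R8c for its signed reading. -/
structure seg6b_AtB (a : Word) (u₀ : State) (g : G) (pass cs i pcount b : Nat) (v : State) : Prop where
  /-- at the address `a` -/
  rip : v.rip = a
  /-- COMMON -/
  common : Common u₀ g v
  /-- this is the variant `ch > 2` -/
  ch3 : 3 ≤ g.ch
  /-- `r12 = r` -/
  r12 : v.reg .r12 = UInt64.ofNat g.r
  /-- path A -/
  path : PathA g pass v
  /-- `r15d = pcount` -/
  r15 : v.reg .r15 = UInt64.ofNat pcount
  /-- `r13d = i` -/
  r13 : v.reg .r13 = UInt64.ofNat i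
  /-- `[rbp−0xd8] = class_set` -/
  sl_cs : v.mem.readLE (g.e.reg .rsp - 224) 4 = cs
  /-- the invariant of the i-loop -/
  wi : WInnerInv v.mem g.f g.r g.TB g.C g.PRD g.W g.rowsA pass cs i pcount
  /-- CI on `c_inter`, `p_inter` -/
  inter : InterAt v.mem g.ci g.pi g.ch g.n
  /-- `i < classwords` -/
  i_lt : i < g.W
  /-- `pcount < part_read` -/
  lt : pcount < g.PRD
  /-- `[rbp−0xb8] = r->part_size` (the record's field as at the function's entry) -/
  sl_psz : v.mem.readLE (g.e.reg .rsp - 192) 4 = Residue.part_size g.e.mem g.r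
  /-- `[rbp−0x98] = z(pcount) = begin + pcount·part_size` -/
  sl_z : v.mem.readLE (g.e.reg .rsp - 160) 4 = Residue.begin g.e.mem g.r + pcount * Residue.part_size g.e.mem g.r
  /-- `rbx = b`, zero-extended from 16 bits -/
  rbx : v.reg .rbx = UInt64.ofNat b
  /-- `b` is a 16-bit value -/
  b_lt : b < 65536
  /-- R8c: `residue_books[c][pass]` is −1 or a codebook number -/
  book : sint16 b = -1 ∨ (0 ≤ sint16 b ∧ sint16 b < stb_vorbis.codebook_count v.mem g.f)

/-- 0x10f5c4: `mov rdi, rbx` (rbx = `&part_classdata[0][class_set]`). -/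
abbrev seg6b_stop1 : Word := Vorbis.L.decode_residue.ret67 + 14

/-- 0x10f5d8: `mov rdi, rcx` (rbx = rcx = the address of the class byte). -/
abbrev seg6b_stop2 : Word := Vorbis.L.decode_residue.ret68 + 12

/-- 0x10f600: `lea rdi, [rbx + r14*2]` (rbx = `&residue_books[c]`, r14 = pass). -/
abbrev seg6b_stop3 : Word := Vorbis.L.decode_residue.ret70 + 19

/-- 0x10f60e: `test bx, 0x8000` (C 2237 `if (b >= 0)`). -/
abbrev seg6b_test : Word := Vorbis.L.decode_residue.ret71 + 5

/-- 0x10f4ed: the call arm (`mov r14, [rbp-0xb0]`, C 2238). -/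
abbrev seg6b_arm : Word := Vorbis.L.decode_residue.cut20 - 80

/-- Where the temp block lies: inside the data space, off the stack region (`ADOBusy.tblock`, `ArenaOK.tblock_range`, AR1, AR1x). -/
theorem seg6b_tb_where {u₀ : State} {g : G} {v : State} (hc : Common u₀ g v) :
    0x100000 ≤ g.TB.base ∧ g.TB.base + g.TB.size ≤ 0xC00000 ∧
      (g.TB.base + g.TB.size ≤ 0x700000 ∨ 0x800000 ≤ g.TB.base) := by
  have htb := hc.tblock
  have hrange := hc.point.busy.ok.tblock_range htb
  have h1x := hc.point.busy.ok.AR1x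
  have har1 := hc.point.busy.ok.AR1
  have hr8 := le_r8 g.TB.size
  omega

/-- `movsxd rbx, [class_set] ; shl rbx, k` for a small non-negative int: the scaled index as a number. -/
theorem seg6b_sext_shl (x k : Nat) (hx : x < 2 ^ 31) (hk : k < 8) :
    Word.ofBV (BitVec.signExtend 64 (BitVec.ofNat 32 x)) <<< (UInt64.ofNat k) = addr (2 ^ k * x) := by
  have e1 : (Word.ofBV (BitVec.signExtend 64 (BitVec.ofNat 32 x))).toNat = x := by
    rw [toNat_sext32 _ (by rw [toNat_ofNat32 x (by omega)]; exact hx), toNat_ofNat32 x (by omega)]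
  apply eq_addr
  rw [UInt64.toNat_shiftLeft, e1, UInt64.toNat_ofNat', Nat.shiftLeft_eq]
  have h2 : k % 2 ^ 64 % 64 = k := by omega
  rw [h2]
  have : 2 ^ k ≤ 128 := by
    have : k ≤ 7 := by omega
    calc 2 ^ k ≤ 2 ^ 7 := Nat.pow_le_pow_right (by omega) this
      _ = 128 := by decide
  have hm : x * 2 ^ k < 2 ^ 64 := by
    have := Nat.mul_le_mul (Nat.le_of_lt hx) this
    omega
  rw [Nat.mod_eq_of_lt hm, Nat.mul_comm]

/-- The walker's form of `lea ecx, [rbx + rax]`: the low half of the 64-bit sum of two zero-extended 32-bit values. -/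
theorem seg6b_z_lea (x y : BitVec 32) :
    (BitVec.setWidth 32 (Word.ofBV x + Word.ofBV y).toBitVec).toNat = (x.toNat + y.toNat) % 2 ^ 32 := by
  rw [BitVec.toNat_setWidth, UInt64.toNat_toBitVec, UInt64.toNat_add, toNat_ofBV32, toNat_ofBV32]
  have := x.isLt
  have := y.isLt
  omega

/-- `movsxd r14, [pass]` for a small non-negative int. -/
theorem seg6b_sext_ofNat (x : Nat) (hx : x < 2 ^ 31) : Word.ofBV (BitVec.signExtend 64 (BitVec.ofNat 32 x)) = addr x := by
  apply eq_addr
  rw [toNat_sext32 _ (by rw [toNat_ofNat32 x (by omega)]; exact hx), toNat_ofNat32 x (by omega)]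

/-- `movzx ebx, BYTE [rbx] ; movzx ebx, bl ; shl rbx, 4`: the class number times 16. -/
theorem seg6b_zext_shl4 (c : Nat) (hc : c < 256) :
    Word.ofBV (BitVec.setWidth 64 (BitVec.zeroExtend 32 (BitVec.setWidth 8 (BitVec.zeroExtend 32 (BitVec.ofNat 8 c))))) <<< 4
      = addr (16 * c) := by
  apply eq_addr
  have e : (Word.ofBV (BitVec.setWidth 64 (BitVec.zeroExtend 32 (BitVec.setWidth 8 (BitVec.zeroExtend 32
      (BitVec.ofNat 8 c)))))).toNat = c := by
    unfold Word.ofBV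
    simp only [UInt64.toNat_ofBitVec, BitVec.toNat_setWidth, BitVec.zeroExtend, BitVec.toNat_ofNat]
    omega
  show (_ <<< (UInt64.ofNat 4)).toNat = _
  rw [UInt64.toNat_shiftLeft, e, UInt64.toNat_ofNat', Nat.shiftLeft_eq]
  have h2 : 4 % 2 ^ 64 % 64 = 4 := by decide
  rw [h2]
  omega

/-- `movsxd rax, r13d` for a small non-negative int. -/
theorem seg6b_sext_part (x : Nat) (hx : x < 2 ^ 31) :
    Word.ofBV (BitVec.signExtend 64 (Word.part Width.w32 (UInt64.ofNat x))) = addr x := by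
  have e : (Word.part Width.w32 (UInt64.ofNat x)).toNat = x := by
    rw [Asan.part32_toNat, UInt64.toNat_ofNat']
    omega
  apply eq_addr
  rw [toNat_sext32 _ (by rw [e]; exact hx), e]

/-- Bit 15 of a 16-bit value (a `BitVec` fact, by `bv_decide`). -/
theorem seg6b_bit15_bv (x : BitVec 16) : (x &&& 32768#16) = 0#16 ↔ x < 32768#16 := by
  bv_decide

/-- `test bx, 0x8000`: the sign of `b = residue_books[c][pass]`. -/
theorem seg6b_bit15 (b : Nat) (hb : b < 65536) :
    (Word.part Width.w16 (UInt64.ofNat b) &&& 32768#16).toNat = 0 ↔ b < 32768 := by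
  have e : (Word.part Width.w16 (UInt64.ofNat b)).toNat = b := by
    unfold Word.part
    simp only [Width.bits, BitVec.toNat_setWidth, UInt64.toNat_toBitVec, UInt64.toNat_ofNat']
    omega
  have h := seg6b_bit15_bv (Word.part Width.w16 (UInt64.ofNat b))
  rw [BitVec.lt_def, e] at h
  have e0 : (32768#16).toNat = 32768 := by decide
  rw [e0] at h
  rw [← h]
  constructor
  · intro h0
    apply BitVec.eq_of_toNat_eq
    rw [h0]
    rfl
  · intro h0
    rw [h0]
    rfl

/-- `add r13d, 1` on a small counter. -/
theorem seg6b_incr32 (x : Nat) (hx : x + 1 < 2 ^ 32) :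
    Word.ofBV (Word.part Width.w32 (UInt64.ofNat x) + 1#32) = UInt64.ofNat (x + 1) := by
  apply UInt64.toNat_inj.mp
  rw [toNat_ofBV32, BitVec.toNat_add, Asan.part32_toNat, UInt64.toNat_ofNat', UInt64.toNat_ofNat']
  have e1 : (1#32).toNat = 1 := by decide
  rw [e1]
  omega

/-! ### The front of the body: 0x10f579 … 0x10f60e -/

set_option maxRecDepth 4000 in
set_option maxHeartbeats 4000000 in
/-- **The front of the body proper** (0x10f579 … 0x10f60e; C 2230–2236): `z`, `c = part_classdata[0][class_set][i]`,
`b = r->residue_books[c][pass]`: seven check sites (the record ×3, TB's row pointer, the slot, the class byte through a ROWPTR,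
`residue_books[c][pass]` by R8b + R8). Walked in four stages: the three computed addresses are restated as numbers in between. -/
theorem seg6b_front {Lay : Layout} (hLay : Lay.hi = 0x1000000) {μ : Microarch} (hμ : UserX.MicroOK μ) {u₀ : State}
    (hcode : HasCodeNat Lay u₀ Vorbis.L.decode_residue.entry Vorbis.Code.code_decode_residue.nat Vorbis.L.decode_residue.size)
    (h_load8 : Asan.SmallCheck Lay μ Vorbis.WayInv (Vorbis.CodeOK u₀) [.rax, .rcx, .rdx] 8 Vorbis.L.__asan_load8_noabort.entry)
    (h_load4 : Asan.SmallCheck Lay μ Vorbis.WayInv (Vorbis.CodeOK u₀) [.rax, .rcx, .rdx] 4 Vorbis.L.__asan_load4_noabort.entry)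
    (h_load1 : Asan.SmallCheck Lay μ Vorbis.WayInv (Vorbis.CodeOK u₀) [.rax, .rdx] 1 Vorbis.L.__asan_load1_noabort.entry)
    (h_load2 : Asan.SmallCheck Lay μ Vorbis.WayInv (Vorbis.CodeOK u₀) [.rax, .rcx, .rdx] 2 Vorbis.L.__asan_load2_noabort.entry)
    {g : G} (hent : Entered u₀ g) (pass cs i pcount : Nat) (v : State)
    (hat : AtTurn u₀ g pass cs i pcount v) :
    ReachVia Lay μ WayInv v (fun v' => ∃ b, seg6b_AtB seg6b_test u₀ g pass cs i pcount b v') := by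
  obtain ⟨hrip, hc, hch3, hr12, hpath, hr15, hr13, hslcs, hwi, hinter, hi, hp⟩ := hat
  have he := hent.entry
  v_entry he
  have w_rip := hrip
  have b_rsp := hc.rsp
  have b_rbp := hc.rbp
  have w_eq : Mem.EqOn Vorbis.L.textLo Vorbis.L.textHi u₀.mem v.mem := hc.code
  have hdf : v.flags .df = false := (show abiInv _ from hc.inv).1
  have hmx : v.mxcsr &&& 0x1F80 = 0x1F80 := (show abiInv _ from hc.inv).2
  have hsse := Vorbis.sseOK_of_abiInv hc.inv
  have l_pass := hpath.sl_pass
  have l_pcd := hc.fr_pcd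
  obtain ⟨hrw1, hrw2, hrw3⟩ := rec_where hent
  obtain ⟨htw1, htw2, htw3⟩ := seg6b_tb_where hc
  have b_r12 : v.reg .r12 = addr g.r := hr12
  obtain ⟨bg, hbg⟩ : ∃ bg, Residue.begin v.mem g.r = bg := ⟨_, rfl⟩
  obtain ⟨ps, hps⟩ : ∃ ps, Residue.part_size v.mem g.r = ps := ⟨_, rfl⟩
  have l_bg : v.mem.readLE (addr g.r) 4 = bg := by
    rw [← hbg]
    simp only [vacc, voff]
    rfl
  have l_ps : v.mem.readLE (addr g.r + 8) 4 = ps := by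
    rw [← hps]
    simp only [vfield, vacc, voff]
  have hrn : (addr g.r).toNat = g.r := toNat_addr _ (by omega)
  have hbnd := arg_bounds hent
  have hC : 0 < g.C := by omega
  have l_row : v.mem.readLE (UInt64.ofNat g.TB.base) 8 = rowBase g.TB g.C g.PRD 0 := by
    have h := hc.tb.rows 0 hC
    exact h
  have htn : (UInt64.ofNat g.TB.base).toNat = g.TB.base := toNat_addr _ (by omega)
  have hW := hc.w_pos hent
  have hn4096 := hbnd.1
  have hprd8192 := prd_le hent
  have hcs_lt := hwi.slot_lt hW
  have hres := hc.resAt hent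
  have hR : ResidueOK g.Blk v.mem g.f := hc.point.vorbis.residue
  have hL : BlkLive g.Blk g.Live' := hc.point.env.live
  have hrnlt := hc.rn_lt hent
  have hcfg := hc.config_at
  have hTBl : g.TB.live g.Live' := hc.point.busy.ok.tblock_live_inv hc.shadow hc.tblock
  -- the slot `part_classdata[0][class_set]` and the row pointer in it
  have hsin := slot_inside g.TB hC hcs_lt hc.tb.size
  obtain ⟨rp, hrp⟩ : ∃ rp, v.mem.ptr (slot g.TB g.C g.PRD 0 cs) = rp := ⟨_, rfl⟩
  have hrow : RowPtr v.mem g.f g.r rp := by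
    rw [← hrp]
    exact hwi.rowptr hW (j := 0) rfl
  have l_slot : v.mem.readLE (addr (slot g.TB g.C g.PRD 0 cs)) 8 = rp := hrp
  have hsn : (addr (slot g.TB g.C g.PRD 0 cs)).toNat = slot g.TB g.C g.PRD 0 cs := toNat_addr _ (by omega)
  obtain ⟨q, hq, hrq⟩ := hrow
  have hBrow := hres.R8a_row q hq
  have hrowin := hc.point.env.ok.inside _ hBrow
  have hrowst := hent.pre.free.offStack _ hBrow
  rw [← hrq, hc.w_eq] at hBrow hrowin hrowst
  simp only [] at hrowin hrowst
  have hrow : RowPtr v.mem g.f g.r rp := ⟨q, hq, hrq⟩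
  obtain ⟨c, hcb⟩ : ∃ c, v.mem.u8 (rp + i) = c := ⟨_, rfl⟩
  have hclt : c < Residue.classifications v.mem g.r := by
    rw [← hcb]
    exact hrow.class_lt hres (by rw [hc.w_eq]; exact hi)
  have l_c : v.mem.readLE (addr (rp + i)) 1 = c := hcb
  have hcn : (addr (rp + i)).toNat = rp + i := toNat_addr _ (by omega)
  have hWlt := w_lt g
  obtain ⟨rbks, hrbks⟩ : ∃ rbks, Residue.residue_books v.mem g.r = rbks := ⟨_, rfl⟩
  have l_rbks : v.mem.readLE (addr g.r + 24) 8 = rbks := by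
    rw [← hrbks]
    simp only [vfield, vacc, voff]
  have hB8 := hres.R8
  have hb8in := hc.point.env.ok.inside _ hB8
  have hb8st := hent.pre.free.offStack _ hB8
  rw [hrbks] at hB8 hb8in hb8st
  simp only [] at hb8in hb8st
  have h6 := hres.R6
  have hc256 : c < 256 := by omega
  have hpass7 := hpath.pass_le
  obtain ⟨b, hb⟩ : ∃ b, v.mem.u16 (rbks + 16 * c + 2 * pass) = b := ⟨_, rfl⟩
  have ea : addr (rbks + 16 * c) + addr pass * 2 = addr (rbks + 16 * c + 2 * pass) := by
    rw [addr_mul_lit, addr_add_addr]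
    congr 1
    omega
  have l_b : v.mem.readLE (addr (rbks + 16 * c) + addr pass * 2) 2 = b := by
    rw [ea]
    exact hb
  have hbn : (addr (rbks + 16 * c) + addr pass * 2).toNat = rbks + 16 * c + 2 * pass := by
    rw [ea]
    exact toNat_addr _ (by omega)
  have hblt : b < 65536 := by
    rw [← hb]
    exact Mem.u16_lt _ _
  have hbook : sint16 b = -1 ∨ (0 ≤ sint16 b ∧ sint16 b < stb_vorbis.codebook_count v.mem g.f) := by
    have h := hres.R8c c pass hclt (by omega)
    have e : Residue.book v.mem g.r c pass = sint16 b := by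
      unfold Residue.book
      rw [hrbks]
      show sint16 (v.mem.u16 (rbks + 16 * c + 2 * pass)) = _
      rw [hb]
    rw [e] at h
    exact h
  obtain ⟨k1, k2, k3⟩ := factK_A hent hc hpath.rtype2 hpath.ch_ge hp
  rw [hbg, hps] at k2 k3
  rw [hps] at k1
  clear hr12
  u_walk hcode [hμ.vendor] until [seg6b_stop1] span [Vorbis.L.textLo, Vorbis.L.textHi] side (v_side)
  · -- 0x10f57c: `r->begin`
    have hun : ShadowUntouched v.mem s_10f57c.mem := by v_untouched
    have hs : Site g.Live' g.r 4 := hR.site_record hL hrnlt 0 4 (by simp only [voff]; omega) (by omega) (by rw [hcfg]; omega)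
    exact check_site hc.shadow hun hs hrn
  · -- 0x10f58a: `r->part_size`
    have hun : ShadowUntouched v.mem s_10f58a.mem := by v_untouched
    have hs : Site g.Live' (g.r + 8) 4 := hR.site_record hL hrnlt 8 4 (by simp only [voff]; omega) (by omega) (by rw [hcfg])
    refine check_site hc.shadow hun hs ?_
    u_omega
  · -- 0x10f5b1: `part_classdata[0]`, the row pointer of TB
    have hun : ShadowUntouched v.mem s_10f5b1.mem := by v_untouched
    have hs : Site g.Live' g.TB.base 8 := hc.tb.site_rowptr hTBl hC (by omega)
    exact check_site hc.shadow hun hs htn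
  -- 0x10f5c4: rbx = &part_classdata[0][class_set]
  have w_rbx' : s_10f5c1.reg .rbx = addr (slot g.TB g.C g.PRD 0 cs) := by
    have e3 : Word.ofBV (BitVec.signExtend 64 (BitVec.ofNat 32 cs)) <<< 3 = addr (2 ^ 3 * cs) :=
      seg6b_sext_shl cs 3 (by omega) (by omega)
    rw [w_rbx, e3]
    show addr (2 ^ 3 * cs) + addr (rowBase g.TB g.C g.PRD 0) = _
    rw [addr_add_addr]
    congr 1
    unfold slot
    omega
  clear w_rbx
  have w_rbx := w_rbx'
  clear w_rbx'
  u_walk hcode [hμ.vendor] until [seg6b_stop2] span [Vorbis.L.textLo, Vorbis.L.textHi] side (v_side)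
  · -- 0x10f5c7: the slot `part_classdata[0][class_set]`
    have hun : ShadowUntouched v.mem s_10f5c7.mem := by v_untouched
    have hs : Site g.Live' (slot g.TB g.C g.PRD 0 cs) 8 := hc.tb.site_slot hTBl hC hcs_lt (hc.tb.slot_eq hC cs).symm
    exact check_site hc.shadow hun hs hsn
  -- 0x10f5d8: rbx = rcx = the address of the class byte
  have w_rbx' : s_10f5d5.reg .rbx = addr (rp + i) := by
    rw [w_rbx, seg6b_sext_part i (by omega)]
    show addr i + addr rp = _
    rw [addr_add_addr, Nat.add_comm]
  have w_rcx' : s_10f5d5.reg .rcx = addr (rp + i) := by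
    rw [w_rcx, seg6b_sext_part i (by omega)]
    show addr i + addr rp = _
    rw [addr_add_addr, Nat.add_comm]
  clear w_rbx w_rcx
  have w_rbx := w_rbx'
  have w_rcx := w_rcx'
  clear w_rbx' w_rcx'
  u_walk hcode [hμ.vendor] until [seg6b_stop3] span [Vorbis.L.textLo, Vorbis.L.textHi] side (v_side)
  · -- 0x10f5db: the class byte `part_classdata[0][class_set][i]`, inside a row of `classdata` (ROWPTR + i < W)
    have hun : ShadowUntouched v.mem s_10f5db.mem := by v_untouched
    have hs : Site g.Live' (rp + i) 1 := hrow.site hL hres (by rw [hc.w_eq]; exact hi) rfl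
    exact check_site hc.shadow hun hs hcn
  · -- 0x10f5e8: `r->residue_books`
    have hun : ShadowUntouched v.mem s_10f5e8.mem := by v_untouched
    have hs : Site g.Live' (g.r + 24) 8 := hR.site_record hL hrnlt 24 8 (by simp only [voff]; omega) (by omega) (by rw [hcfg])
    refine check_site hc.shadow hun hs ?_
    u_omega
  -- 0x10f600: rbx = &residue_books[c], r14 = pass
  have w_rbx' : s_10f5f9.reg .rbx = addr (rbks + 16 * c) := by
    rw [w_rbx, seg6b_zext_shl4 c hc256]
    show addr (16 * c) + addr rbks = _
    rw [addr_add_addr, Nat.add_comm]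
  have w_r14' : s_10f5f9.reg .r14 = addr pass := by
    rw [w_r14, seg6b_sext_ofNat pass (by omega)]
  clear w_rbx w_r14
  have w_rbx := w_rbx'
  have w_r14 := w_r14'
  clear w_rbx' w_r14'
  u_walk hcode [hμ.vendor] until [seg6b_test] span [Vorbis.L.textLo, Vorbis.L.textHi] side (v_side)
  · -- 0x10f604: `residue_books[c][pass]` (R8; `c < classifications` by R8b, `pass ≤ 7`)
    have hun : ShadowUntouched v.mem s_10f604.mem := by v_untouched
    have hs : Site g.Live' (rbks + 16 * c + 2 * pass) 2 := hres.site_book hL hclt (k := pass) (by omega) (by rw [hrbks])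
    exact check_site hc.shadow hun hs hbn
  -- 0x10f60e: the assertion `seg6b_AtB`
  have hs : Mem.SameExcept (ownWins g) v.mem s_10f609.mem := by
    show Mem.SameExcept [⟨(g.e.reg .rsp).toNat - 848, (g.e.reg .rsp).toNat - 248⟩,
      ⟨(g.e.reg .rsp).toNat - 224, (g.e.reg .rsp).toNat - 220⟩,
      ⟨(g.e.reg .rsp).toNat - 192, (g.e.reg .rsp).toNat - 188⟩, ⟨(g.e.reg .rsp).toNat - 160, (g.e.reg .rsp).toNat - 156⟩,
      ⟨(g.e.reg .rsp).toNat - 104, (g.e.reg .rsp).toNat - 100⟩, ⟨(g.e.reg .rsp).toNat - 88, (g.e.reg .rsp).toNat - 84⟩]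
      v.mem s_10f609.mem
    u_same
  have hc' : Common u₀ g s_10f609 :=
    common_of_stack hent hc hs ((w_kept .rbp rfl).trans b_rbp) w_rsp w_eq (by v_inv)
  have hwi' : WInnerInv s_10f609.mem g.f g.r g.TB g.C g.PRD g.W g.rowsA pass cs i pcount :=
    winner_of_stack hent hc hs hC hwi
  have hroom := hent.room
  have hinter' : InterAt s_10f609.mem g.ci g.pi g.ch g.n := by
    apply hinter.frame
    · show sint32 (s_10f609.mem.readLE (addr g.ci) 4) = sint32 (v.mem.readLE (addr g.ci) 4)
      unfold G.ci
      rw [addr_slot g hroom.1 104 (by omega)]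
      show sint32 (s_10f609.mem.readLE (g.e.reg .rsp - 104) 4) = sint32 (v.mem.readLE (g.e.reg .rsp - 104) 4)
      congr 1
      u_resolve
    · show sint32 (s_10f609.mem.readLE (addr g.pi) 4) = sint32 (v.mem.readLE (addr g.pi) 4)
      unfold G.pi
      rw [addr_slot g hroom.1 88 (by omega)]
      show sint32 (s_10f609.mem.readLE (g.e.reg .rsp - 88) 4) = sint32 (v.mem.readLE (g.e.reg .rsp - 88) 4)
      congr 1
      u_resolve
  have sl_cs : s_10f609.mem.readLE (g.e.reg .rsp - 224) 4 = cs := by u_resolve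
  have e_ps : Residue.part_size g.e.mem g.r = ps := by
    rw [← hc.reads.part_size]
    exact hps
  have e_bg : Residue.begin g.e.mem g.r = bg := by
    rw [← hc.reads.begin]
    exact hbg
  have sl_psz : s_10f609.mem.readLE (g.e.reg .rsp - 192) 4 = Residue.part_size g.e.mem g.r := by
    rw [e_ps]
    u_resolve
    rw [toNat_ofNat32 ps (by omega)]
    exact Nat.mod_eq_of_lt (by omega)
  have sl_z : s_10f609.mem.readLE (g.e.reg .rsp - 160) 4 =
      Residue.begin g.e.mem g.r + pcount * Residue.part_size g.e.mem g.r := by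
    rw [e_ps, e_bg]
    u_resolve
    rw [seg6b_z_lea, BitVec.toNat_mul, toNat_ofNat32 bg (by omega), toNat_ofNat32 ps (by omega), Asan.part32_toNat,
      UInt64.toNat_ofNat']
    have e1 : pcount % 2 ^ 64 % 2 ^ 32 = pcount := by omega
    rw [e1]
    have e2 : ps * pcount = pcount * ps := Nat.mul_comm _ _
    rw [e2]
    have h1 : pcount * ps < 2 ^ 32 := by omega
    rw [Nat.mod_eq_of_lt h1]
    have h2 : bg + pcount * ps < 2 ^ 32 := by omega
    rw [Nat.mod_eq_of_lt h2]
    exact Nat.mod_eq_of_lt (by omega)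
  have e_rbx : s_10f609.reg .rbx = UInt64.ofNat b := by
    rw [w_rbx]
    apply UInt64.toNat_inj.mp
    unfold Word.ofBV
    simp only [UInt64.toNat_ofBitVec, BitVec.zeroExtend, BitVec.toNat_setWidth, BitVec.toNat_ofNat, UInt64.toNat_ofNat']
    omega
  have e_cc : stb_vorbis.codebook_count s_10f609.mem g.f = stb_vorbis.codebook_count v.mem g.f :=
    hc'.reads.codebook_count.trans hc.reads.codebook_count.symm
  refine ReachVia.done ⟨b, w_rip, hc', hch3, (w_kept .r12 rfl).trans b_r12, patha_of_stack hent hs hpath,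
    (w_kept .r15 rfl).trans hr15, (w_kept .r13 rfl).trans hr13, sl_cs, hwi', hinter', hi, hp, sl_psz, sl_z, e_rbx, hblt, ?_⟩
  rw [e_cc]
  exact hbook

/-! ### The sign test of `b` and the `b < 0` arm: 0x10f60e … 0x10f634, the latch 0x10f549 / 0x10f54d -/

set_option maxRecDepth 4000 in
set_option maxHeartbeats 4000000 in
/-- **The sign test of `b` and the `b < 0` arm** (0x10f60e … 0x10f634, the latch 0x10f549 / 0x10f54d; C 2237, 2242–2244, 2229):
bit 15 clear → the call arm at 0x10f4ed with nothing changed; bit 15 set → `z += part_size`, `cdq ; idiv ch` (no `#DE`: fact K),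
CI again, `++i, ++pcount`: the loop head. -/
theorem seg6b_neg {Lay : Layout} (hLay : Lay.hi = 0x1000000) {μ : Microarch} (hμ : UserX.MicroOK μ) {u₀ : State}
    (hcode : HasCodeNat Lay u₀ Vorbis.L.decode_residue.entry Vorbis.Code.code_decode_residue.nat Vorbis.L.decode_residue.size)
    {g : G} (hent : Entered u₀ g) (pass cs i pcount b : Nat) (v : State)
    (hat : seg6b_AtB seg6b_test u₀ g pass cs i pcount b v) :
    ReachVia Lay μ WayInv v (fun v' => AtInner u₀ g pass cs (i + 1) (pcount + 1) v' ∨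
      (b < 32768 ∧ seg6b_AtB seg6b_arm u₀ g pass cs i pcount b v')) := by
  obtain ⟨hrip, hc, hch3, hr12, hpath, hr15, hr13, hslcs, hwi, hinter, hi, hp, hslpsz, hslz, hrbx, hblt, hbook⟩ := hat
  have he := hent.entry
  v_entry he
  have w_rip := hrip
  have b_rsp := hc.rsp
  have b_rbp := hc.rbp
  have w_eq : Mem.EqOn Vorbis.L.textLo Vorbis.L.textHi u₀.mem v.mem := hc.code
  have hdf : v.flags .df = false := (show abiInv _ from hc.inv).1
  have hmx : v.mxcsr &&& 0x1F80 = 0x1F80 := (show abiInv _ from hc.inv).2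
  have hsse := Vorbis.sseOK_of_abiInv hc.inv
  obtain ⟨psz, hpsz⟩ : ∃ psz, Residue.part_size g.e.mem g.r = psz := ⟨_, rfl⟩
  obtain ⟨bgn, hbgn⟩ : ∃ bgn, Residue.begin g.e.mem g.r = bgn := ⟨_, rfl⟩
  rw [hpsz] at hslpsz
  rw [hpsz, hbgn] at hslz
  have f_ch := hc.fr_ch
  have hbnd := arg_bounds hent
  have hprd8192 := prd_le hent
  have hW := hc.w_pos hent
  have hWlt := w_lt g
  obtain ⟨k1, k2, k3⟩ := factK_A hent hc hpath.rtype2 hpath.ch_ge hp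
  rw [hc.reads.begin, hc.reads.part_size, hbgn, hpsz] at k2 k3
  rw [hc.reads.part_size, hpsz] at k1
  u_walk hcode [hμ.vendor] until [idivArm, seg6b_arm] span [Vorbis.L.textLo, Vorbis.L.textHi] side (v_side)
  · -- bit 15 clear: `b ≥ 0`, the call arm at 0x10f4ed, nothing changed
    have hb15 : b < 32768 := (seg6b_bit15 b hblt).mp hbr_10f613
    have hs : Mem.SameExcept (ownWins g) v.mem s_10f613.mem := by
      rw [w_mem]
      exact Mem.SameExcept.refl _ _
    have hc' : Common u₀ g s_10f613 :=
      common_of_stack hent hc hs ((w_kept .rbp rfl).trans b_rbp) ((w_kept .rsp rfl).trans b_rsp) w_eq (by v_inv)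
    refine ReachVia.done (Or.inr ⟨hb15, w_rip, hc', hch3, (w_kept .r12 rfl).trans hr12, patha_of_stack hent hs hpath,
      (w_kept .r15 rfl).trans hr15, (w_kept .r13 rfl).trans hr13, ?_, ?_, ?_, hi, hp, ?_, ?_, (w_kept .rbx rfl).trans hrbx,
      hblt, ?_⟩)
    · rw [w_mem]
      exact hslcs
    · rw [w_mem]
      exact hwi
    · rw [w_mem]
      exact hinter
    · rw [w_mem, hpsz]
      exact hslpsz
    · rw [w_mem, hpsz, hbgn]
      exact hslz
    · rw [w_mem]
      exact hbook
  · -- bit 15 set: `z += part_size`; 0x10f628, before the `idiv`: the divisor is named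
    have hd : s_10f627.mem.readLE (g.e.reg .rsp - 156) 4 = g.ch := by
      rw [w_mem]
      exact f_ch
    rw [← BitVec.ofNat_add] at w_rax w_rdx
    u_walk hcode [hμ.vendor] until [Vorbis.L.decode_residue.cut21] span [Vorbis.L.textLo, Vorbis.L.textHi] side (v_side)
    case side_nofault =>
      have hq := idiv_nat (psz + (bgn + pcount * psz)) g.ch (by omega) (by omega) (by omega)
      have hcontra := hopt1.symm.trans hq
      cases hcontra
    -- the two ints, the latch
    have hq := idiv_nat (psz + (bgn + pcount * psz)) g.ch (by omega) (by omega) (by omega)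
    have eqr := Option.some.inj (hopt_10f628.symm.trans hq)
    have hs : Mem.SameExcept (ownWins g) v.mem s_10f54d.mem := by
      show Mem.SameExcept [⟨(g.e.reg .rsp).toNat - 848, (g.e.reg .rsp).toNat - 248⟩,
        ⟨(g.e.reg .rsp).toNat - 224, (g.e.reg .rsp).toNat - 220⟩,
        ⟨(g.e.reg .rsp).toNat - 192, (g.e.reg .rsp).toNat - 188⟩, ⟨(g.e.reg .rsp).toNat - 160, (g.e.reg .rsp).toNat - 156⟩,
        ⟨(g.e.reg .rsp).toNat - 104, (g.e.reg .rsp).toNat - 100⟩, ⟨(g.e.reg .rsp).toNat - 88, (g.e.reg .rsp).toNat - 84⟩]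
        v.mem s_10f54d.mem
      u_same
    have hcom : Common u₀ g s_10f54d :=
      common_of_stack hent hc hs ((w_kept .rbp rfl).trans b_rbp) ((w_kept .rsp rfl).trans b_rsp) w_eq (by v_inv)
    have hmodle : (psz + (bgn + pcount * psz)) % g.ch ≤ 8192 := by
      have := Nat.mod_le (psz + (bgn + pcount * psz)) g.ch
      omega
    have hdivle : (psz + (bgn + pcount * psz)) / g.ch ≤ 8192 := by
      have := Nat.div_le_self (psz + (bgn + pcount * psz)) g.ch
      omega
    have eC : (BitVec.ofNat 32 ((psz + (bgn + pcount * psz)) % g.ch)).toNat = (psz + (bgn + pcount * psz)) % g.ch := by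
      rw [BitVec.toNat_ofNat]
      exact Nat.mod_eq_of_lt (by omega)
    have eP : (BitVec.ofNat 32 ((psz + (bgn + pcount * psz)) / g.ch)).toNat = (psz + (bgn + pcount * psz)) / g.ch := by
      rw [BitVec.toNat_ofNat]
      exact Nat.mod_eq_of_lt (by omega)
    have hci : s_10f54d.mem.readLE (g.e.reg .rsp - 104) 4 = (psz + (bgn + pcount * psz)) % g.ch := by
      rw [w_mem, eqr]
      simp only [eC, eP]
      u_read
    have hpi : s_10f54d.mem.readLE (g.e.reg .rsp - 88) 4 = (psz + (bgn + pcount * psz)) / g.ch := by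
      rw [w_mem, eqr]
      simp only [eC, eP]
      u_read
    have hinter' : InterAt s_10f54d.mem g.ci g.pi g.ch g.n :=
      inter_of_z hent (by omega) (by omega) (by omega) hci hpi
    have hC1 : 1 ≤ g.C := by omega
    have hwi' := winner_of_stack hent hc hs hC1 hwi
    have hcs' : s_10f54d.mem.readLE (g.e.reg .rsp - 224) 4 = cs := by
      u_resolve
    refine ReachVia.done (Or.inl ⟨w_rip, hcom, hch3, (w_kept .r12 rfl).trans hr12, patha_of_stack hent hs hpath, ?_, ?_,
      hcs', hwi'.step hi hp, hinter'⟩)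
    · rw [w_r15]
      exact seg6b_incr32 pcount (by omega)
    · rw [w_r13]
      exact seg6b_incr32 i (by omega)

/-! ### COMMON and the loop invariant over the call of codebook_decode_deinterleave_repeat -/

/-- **A window that the call at 0x10f538 may write**: a `CarryWin g 248` (the callee's stack frame and its argument slot below the
steady stack pointer, or a part of a channel buffer), the two ints `c_inter` / `p_inter` inside `[RA − 104, RA − 84)`, or one of the
bit reader's windows of `*f`. -/
def seg6b_Win (g : G) (w : Span) : Prop :=
  CarryWin g 248 w ∨ (g.RA - 104 ≤ w.lo ∧ w.hi ≤ g.RA - 84) ∨ w ∈ bookWins g.f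

/-- **What such a window misses**: the temp block; the own frame above the steady stack pointer but for the two ints; every block
whose content the configuration reads (SEP of the entry memory); the arena fields of `*f`. -/
theorem seg6b_win_apart {u₀ : State} {g : G} {v : State} (he : Entered u₀ g) (c : Common u₀ g v) {w : Span}
    (hw : seg6b_Win g w) :
    (w.hi ≤ g.TB.base ∨ g.TB.base + g.TB.size ≤ w.lo) ∧
    (w.hi ≤ g.RA - 248 ∨ g.RA ≤ w.lo ∨ (g.RA - 104 ≤ w.lo ∧ w.hi ≤ g.RA - 84)) ∧
    (∀ B, ConfigOK.Reads g.e.mem g.f B → B.base + B.size ≤ w.lo ∨ w.hi ≤ B.base) ∧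
    (∀ a, a ∈ ADO.wins → g.f + a.2 ≤ w.lo ∨ w.hi ≤ g.f + a.1) := by
  have hpre := he.pre
  have hroom := he.room
  have hob : g.Blk (objBlock g.f) := hpre.vorbis.obj
  have hobst := hpre.free.offStack _ hob
  have hobgap := hpre.free.offGap _ hob
  simp only [vblock, voff] at hobst hobgap
  have hbusy : ADOBusy g.A' g.others' v.mem g.f g.sz := c.point.busy
  have htr := hbusy.ok.tblock_range c.tblock
  have htoff := hbusy.ok.tblock_off c.tblock
  have h2 := hbusy.ok.AR2
  have hl8 := le_r8 g.TB.size
  unfold G.A' at htr h2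
  simp only [varena] at htr h2
  have hado : ∀ a, a ∈ ADO.wins → a.1 ≤ a.2 ∧ a.2 ≤ 1808 := by
    intro a ha
    have h := (by decide : WinsBelow ADO.wins 1808) a ha
    simp only [ADO.wins, List.mem_cons, List.mem_nil_iff, or_false] at ha
    rcases ha with rfl | rfl
    · exact ⟨by decide, by decide⟩
    · exact ⟨by decide, by decide⟩
  rcases hw with hcw | hint | hbk
  · -- a `CarryWin`
    obtain ⟨_, hoffobj, hofftb, hoffra⟩ := hcw.carry_apart he c (by omega : 248 ≤ 848)
    refine ⟨hofftb, ?_, ?_, ?_⟩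
    · omega
    · intro B hR
      have hB : g.Blk B := he.vorbis.config.reads_blk hR
      rcases hcw with ⟨h1, h2'⟩ | ⟨k, hk, h1, h2'⟩
      · have hst := hpre.free.offStack B hB
        omega
      · have hk' : k < nchan g.e.mem g.f := hk
        have hkint : (k : Int) < stb_vorbis.channels g.e.mem g.f := by
          rw [nchan_def] at hk'
          omega
        have hd := he.sep.buf B hR _ (SampleBuf.chan k hkint)
        simp only [vblock] at hd
        omega
    · intro a ha
      have := hado a ha
      omega
  · -- the two ints
    refine ⟨by omega, by omega, ?_, ?_⟩
    · intro B hR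
      have hB : g.Blk B := he.vorbis.config.reads_blk hR
      have hst := hpre.free.offStack B hB
      omega
    · intro a ha
      have := hado a ha
      omega
  · -- a window of `*f`
    have hin : g.f + 48 ≤ w.lo ∧ w.hi ≤ g.f + 1784 ∧
        (w.hi ≤ g.f + 56 ∨ g.f + 84 ≤ w.lo) ∧ (w.hi ≤ g.f + 96 ∨ g.f + 136 ≤ w.lo) := by
      unfold bookWins at hbk
      simp only [List.mem_cons, List.mem_nil_iff, or_false] at hbk
      rcases hbk with rfl | rfl | rfl | rfl | rfl <;> simp only [] <;> omega
    refine ⟨by omega, by omega, ?_, ?_⟩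
    · intro B hR
      have hd := he.sep.obj B hR
      simp only [vblock, voff] at hd
      omega
    · intro a ha
      simp only [ADO.wins, List.mem_cons, List.mem_nil_iff, or_false] at ha
      rcases ha with rfl | rfl <;> simp only [] <;> omega

/-- **Every window of the call's footprint is a `seg6b_Win`**: the callee's stack frame `⟨lo, hi⟩` and its argument slot lie below the
steady stack pointer; the two ints; the reader's windows of `*f`; a non-NULL output window is the front of a channel buffer
(`Entered.deint_out_chan`, `2·n ≤ blocksize_1`). `s`: the state at the callee's first instruction. -/
theorem seg6b_deint_class {u₀ : State} {g : G} (he : Entered u₀ g) {s : State}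
    (hsame : Mem.SameExcept (g.spec.footprint g.e) g.e.mem s.mem)
    (hrsp : (s.reg .rsp).toNat = g.RA - 272) (hrdi : (s.reg .rdi).toNat = g.f) (hrdx : (s.reg .rdx).toNat = g.rb)
    (hrcx : argU32 (s.reg .rcx) = g.ch) (hr8 : (s.reg .r8).toNat = g.ci) (hr9 : (s.reg .r9).toNat = g.pi)
    (hlen : s.mem.u32 (g.RA - 264) = g.n) {lo hi : Nat} (hlo : g.RA - 848 ≤ lo) (hhi : hi ≤ g.RA - 248) :
    ∀ w, w ∈ (⟨lo, hi⟩ :: deint.wins s : List Span) → seg6b_Win g w := by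
  intro w hw
  have hroom := he.room
  have e8 : (s.reg .rsp).toNat + 8 = g.RA - 264 := by omega
  rcases List.mem_cons.mp hw with hw0 | hw1
  · left
    left
    rw [hw0]
    exact ⟨hlo, hhi⟩
  rcases deint.wins_cases hw1 with hb | h8 | h9 | hslot | ⟨k, hk, hnz, hwin⟩
  · right
    right
    rw [hrdi] at hb
    exact hb
  · right
    left
    rw [h8, hr8]
    unfold G.ci
    simp only []
    omega
  · right
    left
    rw [h9, hr9]
    unfold G.pi
    simp only []
    omega
  · left
    left
    rw [hslot]
    simp only []
    omega
  · left
    right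
    rw [hrcx] at hk
    rw [hrdx] at hnz hwin
    rw [e8, hlen] at hwin
    obtain ⟨c, hc, hptr⟩ := he.deint_out_chan hsame hk hnz
    have hn := he.args.n_le
    refine ⟨c, hc, ?_, ?_⟩
    · rw [hwin, hptr]
      exact Nat.le_refl _
    · rw [hwin, hptr]
      simp only []
      omega

/-- **COMMON, the frame's slots and FILL after the call at 0x10f538.** `v`: a state with COMMON whose memory is the one at the
callee's first instruction; `m`: the memory after the return; `ws`: the call's footprint, every window a `seg6b_Win`. The callee's
post gives the shadow (`hun`) and `Bits`, μ (`hrp`). -/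
theorem seg6b_call_carry {u₀ : State} {g : G} (he : Entered u₀ g) {v : State} (c : Common u₀ g v) {ws : List Span} {m : Mem}
    (hws : ∀ w, w ∈ ws → seg6b_Win g w) (hcall : Mem.SameExcept ws v.mem m)
    (hfoot : Mem.SameExcept (g.spec.footprint g.e) g.e.mem m)
    (hun : ShadowUntouched v.mem m) (hrp : ReaderPost g.Blk g.len v.mem m g.f) :
    (∀ k n : Nat, n ≤ k → k ≤ 248 → (104 ≤ k - n ∨ k ≤ 84) →
      m.readLE (g.e.reg .rsp - UInt64.ofNat k) n = v.mem.readLE (g.e.reg .rsp - UInt64.ofNat k) n) ∧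
    (∀ v' : State, v'.mem = m → v'.reg .rbp = g.e.reg .rsp - 8 → v'.reg .rsp = g.e.reg .rsp - 248 → CodeOK u₀ v'.mem →
      abiInv v' → Common u₀ g v') ∧
    (∀ j mm, j < g.C → Fill v.mem g.f g.r g.TB g.C g.PRD j mm → mm ≤ g.PRD → Fill m g.f g.r g.TB g.C g.PRD j mm) := by
  have hroom := he.room
  have hob : g.Blk (objBlock g.f) := he.vorbis.obj
  have hobin := he.pre.env.ok.inside _ hob
  simp only [vblock, voff] at hobin
  -- a slot of the own frame above the steady stack pointer, off the two ints
  have rd : ∀ k n : Nat, n ≤ k → k ≤ 248 → (104 ≤ k - n ∨ k ≤ 84) →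
      m.readLE (g.e.reg .rsp - UInt64.ofNat k) n = v.mem.readLE (g.e.reg .rsp - UInt64.ofNat k) n := by
    intro k n hn hk hoff
    have e := toNat_slot6 g hroom.1 k (by omega)
    apply hcall.readLE
    · rw [e]
      omega
    · intro w hw
      rw [e]
      have h := (seg6b_win_apart he c (hws w hw)).2.1
      omega
  -- the temp block
  have htb : g.TB.Kept v.mem m := by
    have hbusy : ADOBusy g.A' g.others' v.mem g.f g.sz := c.point.busy
    have ht := hbusy.ok.tblock_off c.tblock
    apply Block.Kept.of_sameExcept hcall
    · intro w hw
      have h := (seg6b_win_apart he c (hws w hw)).1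
      omega
    · omega
  -- the record reads as before: both memories read as at the entry
  have hrd : ResidueReads v.mem g.f m g.f g.r := by
    have r1 := c.reads
    have r2 := (he.reads hfoot).1
    constructor
    · rw [r2.begin, r1.begin]
    · rw [r2.end_, r1.end_]
    · rw [r2.part_size, r1.part_size]
    · rw [r2.classifications, r1.classifications]
    · rw [r2.classbook, r1.classbook]
    · rw [r2.classdata, r1.classdata]
    · rw [r2.residue_books, r1.residue_books]
    · rw [r2.codebook_count, r1.codebook_count]
    · rw [r2.cbk, r1.cbk]
    · rw [r2.E, r1.E]
    · rw [r2.W, r1.W]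
  -- the `classdata` table: a block the configuration of the entry memory reads
  have hcd : (Block.mk (Residue.classdata v.mem g.r) (8 * Residue.E v.mem g.f g.r)).Kept v.mem m := by
    have hres : ResidueAtOK g.Blk g.e.mem g.f g.r := he.vorbis.residue.record g.rn he.args.rn_lt
    have hR : ConfigOK.Reads g.e.mem g.f ⟨Residue.classdata g.e.mem g.r, 8 * Residue.E g.e.mem g.f g.r⟩ :=
      ConfigOK.Reads.residue (ResidueOK.Owns.record g.rn he.args.rn_lt _ ResidueAtOK.Owns.classdata)
    rw [c.reads.classdata, c.reads.E]
    apply Block.Kept.of_sameExcept hcall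
    · intro w hw
      have h := (seg6b_win_apart he c (hws w hw)).2.2.1 _ hR
      simp only [] at h ⊢
      omega
    · exact he.pre.env.ok.no_wrap hres.R8a
  refine ⟨rd, ?_, ?_⟩
  · intro v' hm rbp rsp code inv
    have rd' : ∀ k n : Nat, n ≤ k → k ≤ 248 → (104 ≤ k - n ∨ k ≤ 84) →
        v'.mem.readLE (g.e.reg .rsp - UInt64.ofNat k) n = v.mem.readLE (g.e.reg .rsp - UInt64.ofNat k) n := by
      rw [hm]
      exact rd
    apply Common.of_frame he rbp rsp code inv
    · exact (congrArg UInt64.ofNat (rd' 8 8 (by omega) (by omega) (by omega))).trans c.s_rbp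
    · exact (congrArg UInt64.ofNat (rd' 16 8 (by omega) (by omega) (by omega))).trans c.s_r15
    · exact (congrArg UInt64.ofNat (rd' 24 8 (by omega) (by omega) (by omega))).trans c.s_r14
    · exact (congrArg UInt64.ofNat (rd' 32 8 (by omega) (by omega) (by omega))).trans c.s_r13
    · exact (congrArg UInt64.ofNat (rd' 40 8 (by omega) (by omega) (by omega))).trans c.s_r12
    · exact (congrArg UInt64.ofNat (rd' 48 8 (by omega) (by omega) (by omega))).trans c.s_rbx
    · exact (congrArg UInt64.ofNat (rd' 184 8 (by omega) (by omega) (by omega))).trans c.fr_f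
    · exact (congrArg UInt64.ofNat (rd' 216 8 (by omega) (by omega) (by omega))).trans c.fr_rb
    · exact (rd' 156 4 (by omega) (by omega) (by omega)).trans c.fr_ch
    · exact (rd' 196 4 (by omega) (by omega) (by omega)).trans c.fr_prd
    · exact (rd' 200 4 (by omega) (by omega) (by omega)).trans c.fr_w
    · exact (rd' 232 4 (by omega) (by omega) (by omega)).trans c.fr_rtype
    · exact (rd' 176 8 (by omega) (by omega) (by omega)).trans c.fr_pcd
    · exact (rd' 240 8 (by omega) (by omega) (by omega)).trans c.fr_si
    · rw [hm]
      exact hfoot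
    · rw [hm]
      exact c.shadow.untouched hun
    · rw [hm]
      exact hrp.bits
    · -- ADOBusy: the arena fields of `*f` are off every window
      rw [hm]
      have hb : ADOBusy g.A' g.others' v.mem g.f g.sz := c.point.busy
      apply hb.transfer
      apply ObjEq.of_sameExcept hcall
      · intro w hw
        have := (by decide : WinsBelow ADO.wins 1808) w hw
        omega
      · intro a ha w hw
        exact (seg6b_win_apart he c (hws w hw)).2.2.2 a ha
    · rw [hm]
      apply c.tb.frame
      apply htb.mono
      · show g.TB.base ≤ g.TB.base
        omega
      · show g.TB.base + 8 * g.C ≤ g.TB.base + g.TB.size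
        have := c.tb.size
        have h3 : g.C * (8 + 8 * g.PRD) = g.C * 8 + g.C * (8 * g.PRD) := Nat.mul_add _ _ _
        omega
    · rw [hm]
      exact Nat.le_trans hrp.mu_le c.mu_le
  · intro j mm hj hf hmm
    exact hf.frame hj hmm c.tb.size htb hrd hcd

/-! ### The call arm: 0x10f4ed … 0x10f54d, 0x10f639 … 0x10f640 -/

/-- `movsx rsi, bx` for a non-negative 16-bit value. -/
theorem seg6b_sext16 (b : Nat) (hb : b < 32768) :
    Word.ofBV (BitVec.signExtend 64 (Word.part Width.w16 (UInt64.ofNat b))) = addr b := by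
  have e : (Word.part Width.w16 (UInt64.ofNat b)).toNat = b := by
    unfold Word.part
    simp only [Width.bits, BitVec.toNat_setWidth, UInt64.toNat_toBitVec, UInt64.toNat_ofNat']
    omega
  have hm : (Word.part Width.w16 (UInt64.ofNat b)).msb = false := by
    rw [BitVec.msb_eq_decide, e]
    simp only [decide_eq_false_iff_not, Nat.not_le]
    show b < 2 ^ 15
    omega
  apply eq_addr
  unfold Word.ofBV
  simp only [UInt64.toNat_ofBitVec, BitVec.toNat_setWidth, BitVec.toNat_signExtend]
  simp only [hm, Bool.false_eq_true, if_false]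
  rw [e]
  omega

set_option maxRecDepth 4000 in
set_option maxHeartbeats 4000000 in
/-- **The state at the callee's first instruction** (0x10f538 executed: `rsp = RA − 272`): the argument registers and the two
pushed arguments in the ghosts' names — the hypotheses of `deintPre_of`, `Entered.same_through_deint`, `seg6b_deint_class`. The
equations `w_*` are the walker's. -/
theorem seg6b_call_state {Lay : Layout} (hLay : Lay.hi = 0x1000000) {u₀ : State} {g : G} (hent : Entered u₀ g) {v s : State}
    (hc : Common u₀ g v)
    {b psz cbs : Nat} (ret : Nat) (hb15 : b < 32768)
    (hbook : sint16 b = -1 ∨ (0 ≤ sint16 b ∧ sint16 b < stb_vorbis.codebook_count v.mem g.f))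
    (hcbs : stb_vorbis.codebooks v.mem g.f = cbs)
    (hinter : InterAt v.mem g.ci g.pi g.ch g.n) (k1 : 1 ≤ psz) (k3 : psz ≤ 8192)
    (w_rsp : s.reg .rsp = g.e.reg .rsp - 272) (w_rdi : s.reg .rdi = addr g.f)
    (w_rsi : s.reg .rsi = Word.ofBV (BitVec.signExtend 64 (Word.part Width.w16 (UInt64.ofNat b))) * 2120 + UInt64.ofNat cbs)
    (w_rdx : s.reg .rdx = g.e.reg .rsi) (w_rcx : s.reg .rcx = Word.ofBV (BitVec.ofNat 32 g.ch))
    (w_r8 : s.reg .r8 = g.e.reg .rsp - 104) (w_r9 : s.reg .r9 = g.e.reg .rsp - 88)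
    (w_mem : s.mem = ((v.mem.writeLE (g.e.reg .rsp - 256) 8 (BitVec.setWidth 64 (BitVec.ofNat 32 psz)).toNat).writeLE
          (g.e.reg .rsp - 264) 8 (BitVec.setWidth 64 (BitVec.ofNat 32 g.n)).toNat).writeLE (g.e.reg .rsp - 272) 8 ret)
 :
    Mem.SameExcept [⟨g.RA - 848, g.RA - 248⟩] v.mem s.mem ∧
    Mem.SameExcept (ownWins g) v.mem s.mem ∧ (s.reg .rsp).toNat = g.RA - 272 ∧ (s.reg .rdi).toNat = g.f ∧
    ((b : Int) < stb_vorbis.codebook_count s.mem g.f) ∧ (s.reg .rsi).toNat = stb_vorbis.codebooks_at s.mem g.f b ∧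
    (s.reg .rdx).toNat = g.rb ∧ argU32 (s.reg .rcx) = g.ch ∧ (s.reg .r8).toNat = g.ci ∧ (s.reg .r9).toNat = g.pi ∧
    s.mem.u32 (g.RA - 264) = g.n ∧ 1 ≤ s.mem.i32 (g.RA - 256) ∧ InterAt s.mem g.ci g.pi g.ch g.n := by
  have he := hent.entry
  v_entry he
  have hroom := hent.room
  have hbnd := arg_bounds hent
  have hob : g.Blk (objBlock g.f) := hent.vorbis.obj
  have hobin := hent.pre.env.ok.inside _ hob
  simp only [vblock, voff] at hobin
  have hs : Mem.SameExcept (ownWins g) v.mem s.mem := by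
    show Mem.SameExcept [⟨(g.e.reg .rsp).toNat - 848, (g.e.reg .rsp).toNat - 248⟩,
      ⟨(g.e.reg .rsp).toNat - 224, (g.e.reg .rsp).toNat - 220⟩,
      ⟨(g.e.reg .rsp).toNat - 192, (g.e.reg .rsp).toNat - 188⟩, ⟨(g.e.reg .rsp).toNat - 160, (g.e.reg .rsp).toNat - 156⟩,
      ⟨(g.e.reg .rsp).toNat - 104, (g.e.reg .rsp).toNat - 100⟩, ⟨(g.e.reg .rsp).toNat - 88, (g.e.reg .rsp).toNat - 84⟩]
      v.mem s.mem
    u_same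
  have hs1 : Mem.SameExcept [⟨g.RA - 848, g.RA - 248⟩] v.mem s.mem := by
    show Mem.SameExcept [⟨(g.e.reg .rsp).toNat - 848, (g.e.reg .rsp).toNat - 248⟩] v.mem s.mem
    u_same
  -- the configuration in the memory of `s`: only the own frame was stored to
  obtain ⟨hsame, hbits', hun⟩ := frame_of_stack hent hc hs
  obtain ⟨hv, hsep, hd⟩ := hent.frame hsame hbits'
  have r2 := (hent.reads hsame).1
  have e_cc : stb_vorbis.codebook_count s.mem g.f = stb_vorbis.codebook_count v.mem g.f :=
    r2.codebook_count.trans hc.reads.codebook_count.symm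
  have e_cb : stb_vorbis.codebooks s.mem g.f = cbs := by
    rw [← hcbs]
    simp only [vacc, voff]
    exact (hd.u64 168 (by decide)).trans (hc.obj.u64 168 (by decide)).symm
  have hb : (b : Int) < stb_vorbis.codebook_count s.mem g.f := by
    rw [e_cc]
    unfold sint16 at hbook
    rw [if_pos hb15] at hbook
    omega
  have hcfg := hv.config
  have hcbin := hcfg.cb0.cb_inside hent.pre.env.ok b hb
  refine ⟨hs1, hs, ?_, ?_, hb, ?_, ?_, ?_, ?_, ?_, ?_, ?_, ?_⟩
  · rw [w_rsp]
    exact toNat_slot6 g hroom.1 272 (by omega)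
  · rw [w_rdi]
    exact toNat_addr _ (by omega)
  · rw [w_rsi, seg6b_sext16 b hb15]
    unfold stb_vorbis.codebooks_at at hcbin ⊢
    rw [e_cb] at hcbin ⊢
    simp only [voff] at hcbin ⊢
    rw [addr_mul_lit]
    show (addr (b * 2120) + addr cbs).toNat = _
    rw [addr_add_addr]
    rw [toNat_addr _ (by omega)]
    omega
  · rw [w_rdx]
    rfl
  · rw [w_rcx]
    show (Word.ofBV (BitVec.ofNat 32 g.ch)).toNat % 2 ^ 32 = g.ch
    rw [toNat_ofBV32, toNat_ofNat32 g.ch (by omega)]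
    omega
  · rw [w_r8]
    exact toNat_slot6 g hroom.1 104 (by omega)
  · rw [w_r9]
    exact toNat_slot6 g hroom.1 88 (by omega)
  · -- `[rsp + 8] = n`: the low half of the pushed qword
    have h8 : s.mem.readLE (g.e.reg .rsp - 264) 8 = (BitVec.setWidth 64 (BitVec.ofNat 32 g.n)).toNat := by
      u_resolve
      exact Nat.mod_eq_of_lt (BitVec.isLt _)
    unfold Mem.u32
    rw [addr_slot g hroom.1 264 (by omega)]
    show s.mem.readLE (g.e.reg .rsp - 264) 4 = g.n
    rw [Mem.readLE_prefix _ _ 4 4, h8, BitVec.toNat_setWidth, toNat_ofNat32 g.n (by omega)]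
    omega
  · -- `[rsp + 16] = part_size ≥ 1`
    have h8 : s.mem.readLE (g.e.reg .rsp - 256) 8 = (BitVec.setWidth 64 (BitVec.ofNat 32 psz)).toNat := by
      u_resolve
      exact Nat.mod_eq_of_lt (BitVec.isLt _)
    unfold Mem.i32 Mem.u32
    rw [addr_slot g hroom.1 256 (by omega)]
    show 1 ≤ sint32 (s.mem.readLE (g.e.reg .rsp - 256) 4)
    rw [Mem.readLE_prefix _ _ 4 4, h8, BitVec.toNat_setWidth, toNat_ofNat32 psz (by omega)]
    unfold sint32
    rw [if_pos (by omega)]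
    omega
  · -- CI: the two ints are not stored to
    apply hinter.frame
    · show sint32 (s.mem.readLE (addr g.ci) 4) = sint32 (v.mem.readLE (addr g.ci) 4)
      unfold G.ci
      rw [addr_slot g hroom.1 104 (by omega)]
      show sint32 (s.mem.readLE (g.e.reg .rsp - 104) 4) = sint32 (v.mem.readLE (g.e.reg .rsp - 104) 4)
      congr 1
      u_resolve
    · show sint32 (s.mem.readLE (addr g.pi) 4) = sint32 (v.mem.readLE (addr g.pi) 4)
      unfold G.pi
      rw [addr_slot g hroom.1 88 (by omega)]
      show sint32 (s.mem.readLE (g.e.reg .rsp - 88) 4) = sint32 (v.mem.readLE (g.e.reg .rsp - 88) 4)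
      congr 1
      u_resolve

set_option maxRecDepth 4000 in
set_option maxHeartbeats 4000000 in
/-- **The call arm** (0x10f4ed … 0x10f54d + 0x10f639 … 0x10f640; C 2238–2239, 2229): `book = f->codebooks + b` (one check site), the
call of codebook_decode_deinterleave_repeat; result 1: CI again, `++i, ++pcount`, the loop head; result 0: `done:`. -/
theorem seg6b_call {Lay : Layout} (hLay : Lay.hi = 0x1000000) {μ : Microarch} (hμ : UserX.MicroOK μ) {u₀ : State}
    (hcode : HasCodeNat Lay u₀ Vorbis.L.decode_residue.entry Vorbis.Code.code_decode_residue.nat Vorbis.L.decode_residue.size)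
    (h_load8 : Asan.SmallCheck Lay μ Vorbis.WayInv (Vorbis.CodeOK u₀) [.rax, .rcx, .rdx] 8 Vorbis.L.__asan_load8_noabort.entry)
    {g : G}
    (h_deint : Calls Lay μ Vorbis.WayInv (Vorbis.conv u₀) Vorbis.L.codebook_decode_deinterleave_repeat.entry
      (Vorbis.Spec.codebook_decode_deinterleave_repeat.spec g.others' g.frames' g.Blk g.len))
    (hent : Entered u₀ g) (pass cs i pcount b : Nat) (v : State) (hb15 : b < 32768)
    (hat : seg6b_AtB seg6b_arm u₀ g pass cs i pcount b v) :
    ReachVia Lay μ WayInv v (fun v' => AtInner u₀ g pass cs (i + 1) (pcount + 1) v' ∨ At32 u₀ g v') := by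
  obtain ⟨hrip, hc, hch3, hr12, hpath, hr15, hr13, hslcs, hwi, hinter, hi, hp, hslpsz, hslz, hrbx, hblt, hbook⟩ := hat
  have he := hent.entry
  v_entry he
  have w_rip := hrip
  have b_rsp := hc.rsp
  have b_rbp := hc.rbp
  have w_eq : Mem.EqOn Vorbis.L.textLo Vorbis.L.textHi u₀.mem v.mem := hc.code
  have hdf : v.flags .df = false := (show abiInv _ from hc.inv).1
  have hmx : v.mxcsr &&& 0x1F80 = 0x1F80 := (show abiInv _ from hc.inv).2
  have hsse := Vorbis.sseOK_of_abiInv hc.inv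
  have hroom := hent.room
  obtain ⟨psz, hpsz⟩ : ∃ psz, Residue.part_size g.e.mem g.r = psz := ⟨_, rfl⟩
  rw [hpsz] at hslpsz
  have hbnd := arg_bounds hent
  obtain ⟨k1, k2, k3⟩ := factK_A hent hc hpath.rtype2 hpath.ch_ge hp
  rw [hc.reads.part_size, hpsz] at k1 k2 k3
  -- `*f`: where it is, the `codebooks` field
  have hrdi : g.e.reg .rdi = addr g.f := eq_addr _ _ rfl
  have l_f : UInt64.ofNat (v.mem.readLE (g.e.reg .rsp - 184) 8) = addr g.f := hc.fr_f.trans hrdi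
  have hob : g.Blk (objBlock g.f) := hent.vorbis.obj
  have hobst := hent.pre.free.offStack _ hob
  have hobin := hent.pre.env.ok.inside _ hob
  simp only [vblock, voff] at hobst hobin
  have hfn : (addr g.f).toNat = g.f := toNat_addr _ (by omega)
  obtain ⟨cbs, hcbs⟩ : ∃ cbs, stb_vorbis.codebooks v.mem g.f = cbs := ⟨_, rfl⟩
  have l_cbs : v.mem.readLE (addr g.f + 168) 8 = cbs := by
    rw [← hcbs]
    simp only [vfield, vacc, voff]
  have l_n := hpath.sl_n
  have l_ch := hc.fr_ch
  have l_rb := hc.fr_rb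
  have hL : BlkLive g.Blk g.Live' := hc.point.env.live
  have hbits : Bits g.Blk g.len v.mem g.f := hc.point.vorbis.bits
  u_walk hcode [hμ.vendor] until [Vorbis.L.decode_residue.cut20] span [Vorbis.L.textLo, Vorbis.L.textHi] side (v_side)
  case check_10f4fb =>
    -- 0x10f4fb: `f->codebooks`
    have hun : ShadowUntouched v.mem s_10f4fb.mem := by v_untouched
    have hs : Site g.Live' (g.f + 168) 8 := hbits.site_field hL 168 8 (by omega) (by omega) rfl
    refine check_site hc.shadow hun hs ?_
    u_omega
  case call_inv =>
    v_inv
  case pre_10f538 =>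
    obtain ⟨hs1, hs, hrsp, hrdi, hb, hrsi, hrdx, hrcx, hr8, hr9, hlen, htot, hinter'⟩ :=
      seg6b_call_state hLay hent hc _ hb15 hbook hcbs hinter k1 (by omega) w_rsp w_rdi w_rsi w_rdx w_rcx w_r8 w_r9 w_mem
    obtain ⟨hsame, hbits', hun⟩ := frame_of_stack hent hc hs
    exact deintPre_of hent hc hsame hbits' hun hch3 hrsp hrdi hb hrsi hrdx hrcx hr8 hr9 hlen htot hinter'
  -- 0x10f53d (`cut20`): after the return
  obtain ⟨hs1, hs, hrsp, hrdi, hb, hrsi, hrdx, hrcx, hr8, hr9, hlen, htot, hinter'⟩ :=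
    seg6b_call_state hLay hent hc _ hb15 hbook hcbs hinter k1 (by omega) w_rsp_10f538 w_rdi_10f538 w_rsi_10f538 w_rdx_10f538
      w_rcx_10f538 w_r8_10f538 w_r9_10f538 w_mem_10f538
  obtain ⟨hsame, hbits', hun⟩ := frame_of_stack hent hc hs
  obtain ⟨p_un, p_rd, p_res, p_one, p_zero⟩ := w_post
  rw [hrdi] at p_rd
  -- COMMON's memory facts for the memory at the callee's first instruction
  have hcode_s : CodeOK u₀ s_10f538.mem :=
    (show Mem.EqOn Vorbis.L.textLo Vorbis.L.textHi u₀.mem v.mem from hc.code).trans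
      (hs.eqOn _ _ (ownWins_off g hroom (Or.inl (by decide))))
  have hcm : Common u₀ g { v with mem := s_10f538.mem } :=
    common_of_stack hent hc (v' := { v with mem := s_10f538.mem }) hs hc.rbp hc.rsp hcode_s hc.inv
  -- the footprint of the call: inside ours, every window classified
  have hfoot : Mem.SameExcept (g.spec.footprint g.e) g.e.mem s_10f538r.mem :=
    hent.same_through_deint hsame hrsp hrdi hrdx hrcx hr8 hr9 hlen (lo := (s_10f538.reg .rsp).toNat - 496)
      (hi := (s_10f538.reg .rsp).toNat) (by omega) (by omega) (by omega) w_same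
  have hws := seg6b_deint_class hent hsame hrsp hrdi hrdx hrcx hr8 hr9 hlen (lo := (s_10f538.reg .rsp).toNat - 496)
    (hi := (s_10f538.reg .rsp).toNat) (by omega) (by omega)
  obtain ⟨rd, mkCommon, fillCarry⟩ := seg6b_call_carry hent hcm hws w_same hfoot p_un p_rd
  -- the slots of the frame through the own stores and the call
  have rd2 : ∀ k n : Nat, n ≤ k → k ≤ 248 → (104 ≤ k - n ∨ k ≤ 84) →
      s_10f538r.mem.readLE (g.e.reg .rsp - UInt64.ofNat k) n = v.mem.readLE (g.e.reg .rsp - UInt64.ofNat k) n := by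
    intro k n hn hk hoff
    rw [rd k n hn hk hoff]
    have e := toNat_slot6 g hroom.1 k (by omega)
    apply hs1.readLE
    · rw [e]
      omega
    · intro w hw
      rw [e, List.mem_singleton.mp hw]
      simp only []
      omega
  have l_tap : s_10f538r.mem.readLE (g.e.reg .rsp - 228) 4 = g.tap :=
    (rd2 228 4 (by omega) (by omega) (by omega)).trans hpath.sl_tap
  have hpath' : PathA g pass { v with mem := s_10f538r.mem } :=
    ⟨hpath.rtype2, hpath.ch_ge, hpath.pass_le, (rd2 168 4 (by omega) (by omega) (by omega)).trans hpath.sl_pass, l_tap,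
      (rd2 208 4 (by omega) (by omega) (by omega)).trans hpath.sl_n⟩
  have hcs' : s_10f538r.mem.readLE (g.e.reg .rsp - 224) 4 = cs :=
    (rd2 224 4 (by omega) (by omega) (by omega)).trans hslcs
  have hC1 : 1 ≤ g.C := by omega
  have hW := hc.w_pos hent
  have hwi' : WInnerInv s_10f538r.mem g.f g.r g.TB g.C g.PRD g.W g.rowsA pass cs i pcount := by
    have h1 : WInnerInv s_10f538.mem g.f g.r g.TB g.C g.PRD g.W g.rowsA pass cs i pcount :=
      winner_of_stack hent hc hs hC1 hwi
    apply h1.frame (fun j h => h) ?_ hW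
    intro j m hj hf hm
    have e : j = 0 := hj
    exact fillCarry j m (by omega) hf hm
  have htap32 : g.tap < 2 ^ 32 := by
    have h := hent.ado.ok.AR1
    unfold G.tap
    omega
  have hWlt := w_lt g
  have hprd8192 := prd_le hent
  have e8 : (s_10f538.reg .rsp).toNat + 8 = g.RA - 264 := by omega
  rw [hr8, hr9, hrcx, e8, hlen] at p_one
  have w_eq := Vorbis.conv_code_eqOn w_code
  have w_df : s_10f538r.flags .df = false := (show abiInv _ from w_inv).1
  have w_mx : s_10f538r.mxcsr &&& 0x1F80 = 0x1F80 := (show abiInv _ from w_inv).2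
  have w_sse := Vorbis.sseOK_of_abiInv w_inv
  clear w_same
  rcases p_res with h0 | h1
  · -- result 0: `done:` through 0x10f639 (`mov r15d, [rbp-0xdc]` = tap)
    have w_rax := h0
    u_walk hcode [hμ.vendor] until [Vorbis.L.decode_residue.cut21, Vorbis.L.decode_residue.cut32] span [Vorbis.L.textLo, Vorbis.L.textHi] side (v_side)
    · have hcom : Common u₀ g s_10f640 :=
        mkCommon s_10f640 w_mem ((w_kept .rbp rfl).trans b_rbp) w_rsp w_eq (by v_inv)
      refine ReachVia.done (Or.inr ⟨w_rip, hcom, ?_⟩)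
      rw [w_r15]
      apply UInt64.toNat_inj.mp
      rw [toNat_ofBV32, toNat_ofNat32 g.tap htap32, UInt64.toNat_ofNat']
      omega
    · exact absurd (by decide) hbr_10f543
  · -- result 1: CI again (the callee's post), the latch `++i, ++pcount`, the loop head
    have w_rax := h1
    u_walk hcode [hμ.vendor] until [Vorbis.L.decode_residue.cut21, Vorbis.L.decode_residue.cut32] span [Vorbis.L.textLo, Vorbis.L.textHi] side (v_side)
    · exact absurd hbr_10f543 (by decide)
    · have hcom : Common u₀ g s_10f54d :=
        mkCommon s_10f54d w_mem ((w_kept .rbp rfl).trans b_rbp) w_rsp w_eq (by v_inv)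
      refine ReachVia.done (Or.inl ⟨w_rip, hcom, hch3, (w_kept .r12 rfl).trans hr12, ?_, ?_, ?_, ?_, ?_, ?_⟩)
      · exact ⟨hpath.rtype2, hpath.ch_ge, hpath.pass_le, by rw [w_mem]; exact hpath'.sl_pass, by rw [w_mem]; exact l_tap,
          by rw [w_mem]; exact hpath'.sl_n⟩
      · rw [w_r15]
        exact seg6b_incr32 pcount (by omega)
      · rw [w_r13]
        exact seg6b_incr32 i (by omega)
      · rw [w_mem]
        exact hcs'
      · rw [w_mem]
        exact hwi'.step hi hp
      · rw [w_mem]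
        exact p_one h1

end Vorbis.Spec.decode_residue_6b
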